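-- pv_equiv track=rewrite | github.com/durianh96/InvNet-inv-graph | utils/graph_algorithms.py | cal_net_qty
-- ===== SOURCE A (Python) =====
-- def find_preds_of_node(edges: list):
--     nodes = set([node for tu in edges for node in tu])
--     preds_of_node = {node: set() for node in nodes}
--     for pred, succ in edges:
--         preds_of_node[succ].add(pred)
--     return preds_of_node
--
-- def find_succs_of_node(edges: list):
--     nodes = set([node for tu in edges for node in tu])
--     succs_of_node = {node: set() for node in nodes}
--     for pred, succ in edges:
--         succs_of_node[pred].add(succ)
--     return succs_of_node
--
-- def find_ancestors(preds_of_node, j: str):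
--     ancestors = set()
--     sub_ans_edges = []
--
--     def _dfs(node):
--         if node not in ancestors:
--             ancestors.add(node)
--             if len(preds_of_node[node]) > 0:
--                 for pred in preds_of_node[node]:
--                     sub_ans_edges.append((pred, node))
--                     _dfs(pred)
--
--     _dfs(j)
--
--     return ancestors, sub_ans_edges
--
-- def find_topo_sort(edges: list):
--     topo_sort = []
--     nodes = set([node for tu in edges for node in tu])
--     succs_of_node = find_succs_of_node(edges)
--     visited = set()
--
--     def _dfs(node):
--         if node not in visited:
--             visited.add(node)
--             if len(succs_of_node[node]) > 0:
--                 for succ in succs_of_node[node]: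
--                     _dfs(succ)
--             topo_sort.append(node)
--
--     for node in nodes:
--         _dfs(node)
--     return topo_sort[::-1]
--
-- def cal_net_qty(edges, edge_qty):
--     net_qty = {}
--     preds_of_node = find_preds_of_node(edges)
--     sinks = set([j for _, j in edges]) - set([i for i, _ in edges])
--     for n_id in sinks:
--         n_ancestors, sub_edges = find_ancestors(preds_of_node, n_id)
--         sub_succs_of_node = find_succs_of_node(sub_edges)
--
--         n_net_qty = {an: 0 for an in n_ancestors}
--         n_net_qty.update({n_id: 1})
--
--         sub_topo_sort = find_topo_sort(sub_edges)
--         sub_topo_sort = sub_topo_sort[::-1]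
--         for i in sub_topo_sort[1:]:
--             n_net_qty[i] = sum([edge_qty[i, succ] * n_net_qty[succ] for succ in sub_succs_of_node[i]])
--
--         net_qty.update({(an, n_id): q for an, q in n_net_qty.items()})
--     return net_qty
-- ===== SOURCE B (Python) =====
-- def cal_net_qty(edges, edge_qty):
--     preds = {}
--     for i, j in edges:
--         preds.setdefault(i, set())
--         preds.setdefault(j, set()).add(i)
--     sinks = set(j for _, j in edges) - set(i for i, _ in edges)
--     net_qty = {}
--     for sink in sinks:
--         ancestors = set()
--         sub_succs = {}
--
--         def up(node):
--             if node in ancestors: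
--                 return
--             ancestors.add(node)
--             for p in preds[node]:
--                 sub_succs.setdefault(p, set()).add(node)
--                 up(p)
--
--         up(sink)
--
--         memo = {sink: 1}
--
--         def qty(node):
--             if node not in memo:
--                 memo[node] = sum(edge_qty[node, s] * qty(s) for s in sub_succs[node])
--             return memo[node]
--
--         for an in ancestors:
--             net_qty[(an, sink)] = qty(an)
--     return net_qty
-- ===== Notes on version B (the rewrite author's own statement) =====
-- stated objective: alternative
-- what changed: Per sink, the materialised sub-edge list, the rebuilt successor dicts and the postorder topological sort plus reverse-order DP loop are replaced by accumulating sub_succs directly during the upward ancestor DFS and evaluating each ancestor's net quantity by a memoized top-down recursion.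
import Mathlib
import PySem

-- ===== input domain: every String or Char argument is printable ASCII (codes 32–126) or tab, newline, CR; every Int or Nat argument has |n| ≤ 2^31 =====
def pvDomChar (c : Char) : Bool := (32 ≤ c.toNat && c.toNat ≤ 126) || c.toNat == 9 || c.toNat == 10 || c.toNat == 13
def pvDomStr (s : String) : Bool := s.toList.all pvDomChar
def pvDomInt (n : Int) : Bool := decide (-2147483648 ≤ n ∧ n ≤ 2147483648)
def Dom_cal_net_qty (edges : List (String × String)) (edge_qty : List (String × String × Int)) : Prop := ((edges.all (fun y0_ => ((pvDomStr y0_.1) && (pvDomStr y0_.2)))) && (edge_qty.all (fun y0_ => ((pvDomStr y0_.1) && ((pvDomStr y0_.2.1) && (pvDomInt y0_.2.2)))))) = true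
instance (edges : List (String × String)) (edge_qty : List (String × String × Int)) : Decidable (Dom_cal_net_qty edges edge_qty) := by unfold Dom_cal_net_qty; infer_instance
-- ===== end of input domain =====

-- B replaces A's per-sink sub-edge list + rebuilt successor dicts + postorder topological
-- sort + reverse-order DP loop by accumulating the restricted successor sets during the
-- upward ancestor DFS and evaluating each ancestor by a memoized top-down recursion
-- (objective: alternative decomposition, same asymptotic cost).

-- ===== PORT A =====
-- find_preds_of_node: init every node to an empty set, then add the pred of each edge.
-- (Python indexes preds_of_node[succ] on a key that is always present; Dict.modify with
-- default [] is exact there.)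
def aFindPreds (edges : List (String × String)) : PySem.Dict String (PySem.Set String) :=
  let nodes := PySem.Set.ofList (edges.flatMap (fun e => [e.1, e.2]))
  let d := nodes.foldl (fun d n => d.insert n ([] : PySem.Set String)) PySem.Dict.empty
  edges.foldl (fun d e => d.modify e.2 [] (fun s => PySem.Set.add s e.1)) d

-- find_succs_of_node, same shape with the edge direction flipped.
def aFindSuccs (edges : List (String × String)) : PySem.Dict String (PySem.Set String) :=
  let nodes := PySem.Set.ofList (edges.flatMap (fun e => [e.1, e.2]))
  let d := nodes.foldl (fun d n => d.insert n ([] : PySem.Set String)) PySem.Dict.empty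
  edges.foldl (fun d e => d.modify e.1 [] (fun s => PySem.Set.add s e.2)) d

-- the inner _dfs of find_ancestors; fuel-bounded recursion (the fuel passed by
-- cal_net_qty always exceeds the number of distinct nodes, so it never runs out).
-- State: (ancestors, sub_ans_edges).
def aFaDfs (preds : PySem.Dict String (PySem.Set String)) :
    Nat → String → (PySem.Set String × List (String × String)) →
    (PySem.Set String × List (String × String))
  | 0, _, st => st
  | fuel + 1, node, st =>
    if PySem.Set.contains st.1 node then st
    else
      (preds.getD node []).foldl
        (fun st2 p => aFaDfs preds fuel p (st2.1, st2.2 ++ [(p, node)]))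
        (PySem.Set.add st.1 node, st.2)

-- the inner _dfs of find_topo_sort.  State: (visited, topo_sort).
def aTopoDfs (succs : PySem.Dict String (PySem.Set String)) :
    Nat → String → (PySem.Set String × List String) → (PySem.Set String × List String)
  | 0, _, st => st
  | fuel + 1, node, st =>
    if PySem.Set.contains st.1 node then st
    else
      let st1 := (succs.getD node []).foldl
        (fun st2 s => aTopoDfs succs fuel s st2) (PySem.Set.add st.1 node, st.2)
      (st1.1, st1.2 ++ [node])

-- find_topo_sort
def aFindTopo (edges : List (String × String)) (fuel : Nat) : List String :=
  let nodes := PySem.Set.ofList (edges.flatMap (fun e => [e.1, e.2]))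
  let succs := aFindSuccs edges
  ((nodes.foldl (fun st n => aTopoDfs succs fuel n st)
      (([] : PySem.Set String), ([] : List String))).2).reverse

def cal_net_qty (edges : List (String × String)) (edge_qty : List (String × String × Int)) :
    List (String × String × Int) :=
  let fuel := 2 * edges.length + 1
  let qd : PySem.Dict (String × String) Int :=
    PySem.Dict.ofList (edge_qty.map (fun t => ((t.1, t.2.1), t.2.2)))
  let preds := aFindPreds edges
  let sinks := PySem.Set.diff (PySem.Set.ofList (edges.map (fun e => e.2)))
                              (PySem.Set.ofList (edges.map (fun e => e.1)))
  let net := sinks.foldl (fun (net : PySem.Dict (String × String) Int) n_id =>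
    let res := aFaDfs preds fuel n_id ([], [])
    let subSuccs := aFindSuccs res.2
    let d0 := (res.1.foldl (fun (d : PySem.Dict String Int) an => d.insert an 0)
                 PySem.Dict.empty).insert n_id 1
    let ts := (aFindTopo res.2 (2 * res.2.length + 1)).reverse
    let dF := (ts.drop 1).foldl (fun d i =>
        d.insert i (((subSuccs.getD i []).map
          (fun s => qd.getD (i, s) 0 * d.getD s 0)).sum)) d0
    dF.items.foldl (fun net p => net.insert (p.1, n_id) p.2) net) PySem.Dict.empty
  net.items.map (fun p => (p.1.1, p.1.2, p.2))

-- ===== PORT B =====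
-- preds built edge by edge with setdefault, as in Source B.
def altPreds (edges : List (String × String)) : PySem.Dict String (PySem.Set String) :=
  edges.foldl (fun (d : PySem.Dict String (PySem.Set String)) e =>
    ((d.setdefault e.1 []).setdefault e.2 []).modify e.2 []
      (fun s => PySem.Set.add s e.1)) PySem.Dict.empty

-- the inner `up` of Source B: upward DFS collecting ancestors and the restricted
-- successor sets at the same time.  State: (ancestors, sub_succs).
def altUp (preds : PySem.Dict String (PySem.Set String)) :
    Nat → String → (PySem.Set String × PySem.Dict String (PySem.Set String)) →
    (PySem.Set String × PySem.Dict String (PySem.Set String))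
  | 0, _, st => st
  | fuel + 1, node, st =>
    if PySem.Set.contains st.1 node then st
    else
      (preds.getD node []).foldl
        (fun st2 p => altUp preds fuel p
          (st2.1, st2.2.modify p [] (fun s => PySem.Set.add s node)))
        (PySem.Set.add st.1 node, st.2)

-- the inner `qty` of Source B: memoized top-down evaluation; returns (value, memo).
-- (Source B indexes sub_succs[node] on a key that is present for every non-sink
-- ancestor, and the sink is always memoized; Dict.getD with default [] is exact.)
def altQty (qd : PySem.Dict (String × String) Int)
    (ss : PySem.Dict String (PySem.Set String)) :
    Nat → PySem.Dict String Int → String → (Int × PySem.Dict String Int)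
  | 0, memo, _ => (0, memo)
  | fuel + 1, memo, node =>
    match memo.get? node with
    | some v => (v, memo)
    | none =>
      let r := (ss.getD node []).foldl
        (fun (acc : Int × PySem.Dict String Int) s =>
          let vr := altQty qd ss fuel acc.2 s
          (acc.1 + qd.getD (node, s) 0 * vr.1, vr.2)) (0, memo)
      (r.1, r.2.insert node r.1)

def cal_net_qty_alt (edges : List (String × String)) (edge_qty : List (String × String × Int)) :
    List (String × String × Int) :=
  let fuel := 2 * edges.length + 1
  let qd : PySem.Dict (String × String) Int :=
    PySem.Dict.ofList (edge_qty.map (fun t => ((t.1, t.2.1), t.2.2)))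
  let preds := altPreds edges
  let sinks := PySem.Set.diff (PySem.Set.ofList (edges.map (fun e => e.2)))
                              (PySem.Set.ofList (edges.map (fun e => e.1)))
  let net := sinks.foldl (fun (net : PySem.Dict (String × String) Int) sink =>
    let res := altUp preds fuel sink ([], PySem.Dict.empty)
    ((res.1.foldl (fun (st : PySem.Dict (String × String) Int × PySem.Dict String Int) an =>
        let vr := altQty qd res.2 fuel st.2 an
        (st.1.insert (an, sink) vr.1, vr.2))
        (net, PySem.Dict.empty.insert sink 1))).1) PySem.Dict.empty
  net.items.map (fun p => (p.1.1, p.1.2, p.2))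

-- ===== PRECONDITION & SPEC =====
-- one step of the reflexive reachable-set closure used by Pre_
def pvStepSet (es : List (String × String)) (s : List String) : List String :=
  PySem.Set.update s ((es.filter (fun e => decide (e.1 ∈ s))).map (fun e => e.2))

-- Pre_ excludes edge lists with a directed cycle among nodes from which a sink is
-- reachable (there A's numeric results depend on Python's hash-randomised set iteration
-- order and B's recursion would not terminate), and inputs where an edge whose target
-- reaches a sink is missing from edge_qty (there A raises KeyError).
def Pre_cal_net_qty (edges : List (String × String)) (edge_qty : List (String × String × Int)) : Prop :=
  (∀ e ∈ edges,
    (∃ z ∈ (fun s => pvStepSet edges s)^[2 * edges.length + 1] [e.2],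
      z ∈ edges.map (fun e => e.2) ∧ z ∉ edges.map (fun e => e.1)) →
    e.1 ∉ (fun s => pvStepSet edges s)^[2 * edges.length + 1] [e.2]) ∧
  (∀ e ∈ edges,
    (∃ z ∈ (fun s => pvStepSet edges s)^[2 * edges.length + 1] [e.2],
      z ∈ edges.map (fun e => e.2) ∧ z ∉ edges.map (fun e => e.1)) →
    (e.1, e.2) ∈ edge_qty.map (fun t => (t.1, t.2.1)))

instance (edges : List (String × String)) (edge_qty : List (String × String × Int)) :
    Decidable (Pre_cal_net_qty edges edge_qty) := by unfold Pre_cal_net_qty; infer_instance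

def pvWitness_cal_net_qty : (List (String × String)) × (List (String × String × Int)) :=
  ([("a", "b"), ("b", "c")], [("a", "b", 2), ("b", "c", 3)])

def Spec_cal_net_qty (edges : List (String × String)) (edge_qty : List (String × String × Int))
    (out : List (String × String × Int)) : Prop := out = cal_net_qty_alt edges edge_qty
instance (edges : List (String × String)) (edge_qty : List (String × String × Int))
    (out : List (String × String × Int)) : Decidable (Spec_cal_net_qty edges edge_qty out) := by
  unfold Spec_cal_net_qty; infer_instance

-- ===== CLAIM (what is proved, stated in full; the proofs are below) =====
def Claim_equal_cal_net_qty : Prop := ∀ (edges : List (String × String)) (edge_qty : List (String × String × Int)), Dom_cal_net_qty edges edge_qty → Pre_cal_net_qty edges edge_qty → Spec_cal_net_qty edges edge_qty (cal_net_qty edges edge_qty)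

-- ===== LEMMAS AND PROOFS =====
-- ---------- basic graph notions used by the proofs ----------

def succsL (es : List (String × String)) (x : String) : PySem.Set String :=
  es.foldl (fun s e => if e.1 = x then PySem.Set.add s e.2 else s) []

def predsL (es : List (String × String)) (x : String) : PySem.Set String :=
  es.foldl (fun s e => if e.2 = x then PySem.Set.add s e.1 else s) []

def Reach (es : List (String × String)) (x y : String) : Prop :=
  Relation.ReflTransGen (fun a b => (a, b) ∈ es) x y

def Acyc (es : List (String × String)) : Prop :=
  ∀ x, ¬ Relation.TransGen (fun a b => (a, b) ∈ es) x x

lemma mem_succsL_aux (x y : String) :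
    ∀ (es : List (String × String)) (s0 : PySem.Set String),
    (y ∈ es.foldl (fun s e => if e.1 = x then PySem.Set.add s e.2 else s) s0 ↔
      y ∈ s0 ∨ (x, y) ∈ es) := by
  intro es
  induction es with
  | nil => simp
  | cons e es ih =>
    intro s0
    rcases e with ⟨a, b⟩
    by_cases h : a = x
    · subst h
      simp [List.foldl_cons, ih, PySem.Set.mem_add, List.mem_cons, Prod.mk.injEq]
      tauto
    · have h' : x ≠ a := fun hh => h hh.symm
      simp only [List.foldl_cons, if_neg h, ih, List.mem_cons, Prod.mk.injEq]
      tauto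

lemma mem_predsL_aux (x y : String) :
    ∀ (es : List (String × String)) (s0 : PySem.Set String),
    (y ∈ es.foldl (fun s e => if e.2 = x then PySem.Set.add s e.1 else s) s0 ↔
      y ∈ s0 ∨ (y, x) ∈ es) := by
  intro es
  induction es with
  | nil => simp
  | cons e es ih =>
    intro s0
    rcases e with ⟨a, b⟩
    by_cases h : b = x
    · subst h
      simp [List.foldl_cons, ih, PySem.Set.mem_add, List.mem_cons, Prod.mk.injEq]
      tauto
    · have h' : x ≠ b := fun hh => h hh.symm
      simp only [List.foldl_cons, if_neg h, ih, List.mem_cons, Prod.mk.injEq]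
      tauto

lemma mem_succsL {es : List (String × String)} {x y : String} :
    y ∈ succsL es x ↔ (x, y) ∈ es := by
  unfold succsL; rw [mem_succsL_aux]; simp

lemma mem_predsL {es : List (String × String)} {x y : String} :
    y ∈ predsL es x ↔ (y, x) ∈ es := by
  unfold predsL; rw [mem_predsL_aux]; simp

lemma succsL_append_singleton (es : List (String × String)) (e : String × String) (y : String) :
    succsL (es ++ [e]) y =
      if e.1 = y then PySem.Set.add (succsL es y) e.2 else succsL es y := by
  unfold succsL
  rw [List.foldl_append]
  simp

-- ---------- getD through the dictionary-building folds ----------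

lemma getD_modifyFold1 :
    ∀ (es : List (String × String)) (d : PySem.Dict String (PySem.Set String)) (y : String),
    (es.foldl (fun d e => d.modify e.1 [] (fun s => PySem.Set.add s e.2)) d).getD y []
      = es.foldl (fun s e => if e.1 = y then PySem.Set.add s e.2 else s) (d.getD y []) := by
  intro es
  induction es with
  | nil => intro d y; rfl
  | cons e es ih =>
    intro d y
    simp only [List.foldl_cons]
    rw [ih, PySem.Dict.getD_modify]
    by_cases h : e.1 = y
    · subst h; simp
    · rw [if_neg (fun h' => h h'.symm), if_neg h]

lemma getD_modifyFold2 :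
    ∀ (es : List (String × String)) (d : PySem.Dict String (PySem.Set String)) (y : String),
    (es.foldl (fun d e => d.modify e.2 [] (fun s => PySem.Set.add s e.1)) d).getD y []
      = es.foldl (fun s e => if e.2 = y then PySem.Set.add s e.1 else s) (d.getD y []) := by
  intro es
  induction es with
  | nil => intro d y; rfl
  | cons e es ih =>
    intro d y
    simp only [List.foldl_cons]
    rw [ih, PySem.Dict.getD_modify]
    by_cases h : e.2 = y
    · subst h; simp
    · rw [if_neg (fun h' => h h'.symm), if_neg h]

lemma getD_initFold :
    ∀ (ns : List String) (d : PySem.Dict String (PySem.Set String)) (y : String),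
    d.getD y [] = [] →
    (ns.foldl (fun d n => d.insert n ([] : PySem.Set String)) d).getD y [] = [] := by
  intro ns
  induction ns with
  | nil => intro d y h; exact h
  | cons n ns ih =>
    intro d y h
    simp only [List.foldl_cons]
    apply ih
    rw [PySem.Dict.getD_insert]
    split <;> simp [h]

lemma aFindSuccs_getD (es : List (String × String)) (y : String) :
    (aFindSuccs es).getD y [] = succsL es y := by
  show (es.foldl (fun d e => d.modify e.1 [] (fun s => PySem.Set.add s e.2))
      ((PySem.Set.ofList (es.flatMap (fun e => [e.1, e.2]))).foldl
        (fun d n => d.insert n ([] : PySem.Set String)) PySem.Dict.empty)).getD y []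
    = succsL es y
  rw [getD_modifyFold1, getD_initFold _ _ _ (by rfl)]
  rfl

lemma aFindPreds_getD (es : List (String × String)) (y : String) :
    (aFindPreds es).getD y [] = predsL es y := by
  show (es.foldl (fun d e => d.modify e.2 [] (fun s => PySem.Set.add s e.1))
      ((PySem.Set.ofList (es.flatMap (fun e => [e.1, e.2]))).foldl
        (fun d n => d.insert n ([] : PySem.Set String)) PySem.Dict.empty)).getD y []
    = predsL es y
  rw [getD_modifyFold2, getD_initFold _ _ _ (by rfl)]
  rfl

lemma getD_setdefault_nil (d : PySem.Dict String (PySem.Set String)) (k y : String) :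
    (d.setdefault k []).getD y [] = d.getD y [] := by
  by_cases h : y = k
  · subst h; exact PySem.Dict.getD_setdefault_self d y [] []
  · rw [PySem.Dict.getD_eq_get?_getD,
      PySem.Dict.get?_setdefault_of_ne (k' := y) (k := k) (v := []) d h,
      ← PySem.Dict.getD_eq_get?_getD]

lemma altPreds_getD (edges : List (String × String)) (y : String) :
    (altPreds edges).getD y [] = predsL edges y := by
  unfold altPreds predsL
  have main : ∀ (es : List (String × String)) (d : PySem.Dict String (PySem.Set String)),
      (es.foldl (fun d e => ((d.setdefault e.1 []).setdefault e.2 []).modify e.2 []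
        (fun s => PySem.Set.add s e.1)) d).getD y []
      = es.foldl (fun s e => if e.2 = y then PySem.Set.add s e.1 else s) (d.getD y []) := by
    intro es
    induction es with
    | nil => intro d; rfl
    | cons e es ih =>
      intro d
      simp only [List.foldl_cons]
      rw [ih, PySem.Dict.getD_modify]
      simp only [getD_setdefault_nil]
      by_cases h : e.2 = y
      · subst h; simp
      · rw [if_neg (fun h' => h h'.symm), if_neg h]
  rw [main]
  rfl

lemma preds_getD_eq (edges : List (String × String)) (y : String) :
    (aFindPreds edges).getD y [] = (altPreds edges).getD y [] := by
  rw [aFindPreds_getD, altPreds_getD]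
-- ---------- Pre_'s bounded closure implies genuine acyclicity ----------

lemma nodup_length_le_of_subset {l l' : List String} (h : l.Nodup) (hs : l ⊆ l') :
    l.length ≤ l'.length := by
  classical
  calc l.length = l.toFinset.card := by rw [List.toFinset_card_of_nodup h]
    _ ≤ l'.toFinset.card := by
        apply Finset.card_le_card
        intro a ha
        simp only [List.mem_toFinset] at *
        exact hs ha
    _ ≤ l'.length := l'.toFinset_card_le

lemma stepSet_append (es : List (String × String)) (s : List String) :
    ∃ t, pvStepSet es s = s ++ t := by
  unfold pvStepSet
  rw [PySem.Set.update_eq_append_filter]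
  exact ⟨_, rfl⟩

lemma subset_stepSet (es : List (String × String)) (s : List String) : s ⊆ pvStepSet es s := by
  obtain ⟨t, ht⟩ := stepSet_append es s
  rw [ht]
  exact List.subset_append_left s t

lemma stepSet_closed (es : List (String × String)) (s : List String) {u v : String}
    (hu : u ∈ s) (he : (u, v) ∈ es) : v ∈ pvStepSet es s := by
  unfold pvStepSet
  rw [PySem.Set.mem_update]
  right
  simp only [List.mem_map, List.mem_filter]
  exact ⟨(u, v), ⟨he, by simpa using hu⟩, rfl⟩

lemma stepSet_nodup (es : List (String × String)) (s : List String) (h : s.Nodup) :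
    (pvStepSet es s).Nodup := PySem.Set.nodup_update _ _ h

lemma mem_stepSet (es : List (String × String)) (s : List String) {z : String}
    (hz : z ∈ pvStepSet es s) : z ∈ s ∨ z ∈ es.map (fun e => e.2) := by
  unfold pvStepSet at hz
  rw [PySem.Set.mem_update] at hz
  rcases hz with h | h
  · exact Or.inl h
  · right
    simp only [List.mem_map, List.mem_filter] at h ⊢
    obtain ⟨e, ⟨he, _⟩, hv⟩ := h
    exact ⟨e, he, hv⟩

lemma iter_mono (es : List (String × String)) (x : String) :
    ∀ {i j : Nat}, i ≤ j →
      (pvStepSet es)^[i] [x] ⊆ (pvStepSet es)^[j] [x] := by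
  intro i j hij
  induction j with
  | zero => simp_all
  | succ j ih =>
    rcases Nat.lt_or_ge i (j + 1) with h | h
    · intro z hz
      rw [Function.iterate_succ_apply']
      exact subset_stepSet es _ (ih (Nat.lt_succ_iff.mp h) hz)
    · have : i = j + 1 := le_antisymm hij h
      subst this
      exact fun z hz => hz

lemma iter_inv (es : List (String × String)) (x : String) :
    ∀ k, ((pvStepSet es)^[k] [x]).Nodup ∧
      ∀ z ∈ (pvStepSet es)^[k] [x], z ∈ x :: es.map (fun e => e.2) := by
  intro k
  induction k with
  | zero => simp
  | succ k ih =>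
    rw [Function.iterate_succ_apply']
    refine ⟨stepSet_nodup _ _ ih.1, ?_⟩
    intro z hz
    rcases mem_stepSet es _ hz with h | h
    · exact ih.2 z h
    · exact List.mem_cons_of_mem _ h

lemma reach_mem_iter (es : List (String × String)) {x y : String}
    (h : Reach es x y) : y ∈ (pvStepSet es)^[2 * es.length + 1] [x] := by
  set K := 2 * es.length + 1 with hK
  -- find a fixpoint index k < K
  have hfix : ∃ k < K, (pvStepSet es)^[k + 1] [x] = (pvStepSet es)^[k] [x] := by
    by_contra hcon
    push Not at hcon
    have grow : ∀ k ≤ K, k + 1 ≤ ((pvStepSet es)^[k] [x]).length := by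
      intro k hk
      induction k with
      | zero => simp
      | succ k ih =>
        have hk' : k < K := Nat.lt_of_succ_le hk
        have hne := hcon k hk'
        have hlen : ((pvStepSet es)^[k] [x]).length < ((pvStepSet es)^[k + 1] [x]).length := by
          rw [Function.iterate_succ_apply']
          obtain ⟨t, ht⟩ := stepSet_append es ((pvStepSet es)^[k] [x])
          rw [ht, List.length_append]
          rcases t with _ | ⟨a, t⟩
          · exfalso
            apply hne
            rw [Function.iterate_succ_apply', ht, List.append_nil]
          · simp
        have := ih (le_of_lt hk')
        omega
    have hbig := grow K (le_refl K)
    have hsmall : ((pvStepSet es)^[K] [x]).length ≤ 1 + es.length := by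
      have := iter_inv es x K
      calc ((pvStepSet es)^[K] [x]).length ≤ (x :: es.map (fun e => e.2)).length :=
            nodup_length_le_of_subset this.1 this.2
        _ = 1 + es.length := by simp [Nat.add_comm]
    omega
  obtain ⟨k, hkK, hfixk⟩ := hfix
  have hfixK : pvStepSet es ((pvStepSet es)^[K] [x]) = (pvStepSet es)^[K] [x] := by
    have : ∀ m, (pvStepSet es)^[k + m] [x] = (pvStepSet es)^[k] [x] := by
      intro m
      induction m with
      | zero => rfl
      | succ m ih =>
        have : k + (m + 1) = (k + m) + 1 := by omega
        rw [this, Function.iterate_succ_apply', ih]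
        calc pvStepSet es ((pvStepSet es)^[k] [x])
            = (pvStepSet es)^[k + 1] [x] := (Function.iterate_succ_apply' _ _ _).symm
          _ = (pvStepSet es)^[k] [x] := hfixk
    have h1 : (pvStepSet es)^[K] [x] = (pvStepSet es)^[k] [x] := by
      have hKk : K = k + (K - k) := by omega
      rw [hKk, this (K - k)]
    rw [h1]
    calc pvStepSet es ((pvStepSet es)^[k] [x])
        = (pvStepSet es)^[k + 1] [x] := (Function.iterate_succ_apply' _ _ _).symm
      _ = (pvStepSet es)^[k] [x] := hfixk
  -- the fixpoint is closed under edges and contains x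
  have hx : x ∈ (pvStepSet es)^[K] [x] := iter_mono es x (Nat.zero_le K) (by simp)
  induction h with
  | refl => exact hx
  | tail _ hbc ih =>
    rename_i b c _
    have hb := ih
    have := stepSet_closed es ((pvStepSet es)^[K] [x]) hb hbc
    rwa [hfixK] at this
-- ---------- invariants of find_ancestors' DFS ----------

def uList (edges : List (String × String)) (sink : String) : List String :=
  PySem.Set.ofList (sink :: edges.flatMap (fun e => [e.1, e.2]))

lemma mem_uList_sink (edges : List (String × String)) (sink : String) :
    sink ∈ uList edges sink := by
  simp [uList, PySem.Set.mem_ofList]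

lemma mem_uList_fst {edges : List (String × String)} {a b : String} (sink : String)
    (h : (a, b) ∈ edges) : a ∈ uList edges sink := by
  simp only [uList, PySem.Set.mem_ofList, List.mem_cons, List.mem_flatMap]
  exact Or.inr ⟨(a, b), h, by simp⟩

def meas (U anc : List String) : Nat :=
  (U.filter (fun x => !(PySem.Set.contains anc x))).length

lemma meas_mono (U : List String) {anc anc' : List String} (h : ∀ x ∈ anc, x ∈ anc') :
    meas U anc' ≤ meas U anc := by
  apply List.Sublist.length_le
  apply List.monotone_filter_right
  intro a ha
  simp only [Bool.not_eq_true'] at ha ⊢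
  simp only [PySem.Set.contains_eq_listContains] at ha ⊢
  simp only [List.contains_eq_mem, decide_eq_false_iff_not] at ha ⊢
  exact fun hmem => ha (h a hmem)

lemma meas_le_length (U anc : List String) : meas U anc ≤ U.length :=
  List.Sublist.length_le List.filter_sublist

lemma meas_lt (U : List String) {anc : List String} {x : String}
    (hU : x ∈ U) (hx : x ∉ anc) : meas U (anc ++ [x]) < meas U anc := by
  unfold meas
  have hcong : U.filter (fun z => !(PySem.Set.contains (anc ++ [x]) z)) =
      (U.filter (fun z => !(PySem.Set.contains anc z))).filter (fun z => !(z == x)) := by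
    rw [List.filter_filter]
    apply List.filter_congr
    intro z _
    by_cases h1 : z ∈ anc <;> by_cases h2 : z = x <;>
      simp [h1, h2, List.contains_eq_mem]
  rw [hcong]
  rw [List.length_filter_lt_length_iff_exists]
  refine ⟨x, ?_, by simp⟩
  rw [List.mem_filter]
  simp [hU, List.contains_eq_mem, hx]

def InvFA (edges : List (String × String)) (sink : String)
    (anc : List String) (subE : List (String × String)) : Prop :=
  anc.Nodup ∧
  (∀ x ∈ anc, Reach edges x sink ∧ x ∈ uList edges sink) ∧
  (∀ e ∈ subE, e ∈ edges ∧ e.2 ∈ anc) ∧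
  (∀ x ∈ anc, x = sink ∨ ∃ m, (x, m) ∈ subE)

lemma fa_spec (edges : List (String × String)) (pd : PySem.Dict String (PySem.Set String))
    (hpd : ∀ y, pd.getD y [] = predsL edges y) (sink : String) :
    ∀ fuel node anc subE,
    meas (uList edges sink) anc < fuel →
    node ∈ uList edges sink → Reach edges node sink →
    InvFA edges sink anc subE →
    (∀ e ∈ subE, e.1 ∈ anc ∨ e.1 = node) →
    (node = sink ∨ ∃ m, (node, m) ∈ subE) →
    (∃ d1, (aFaDfs pd fuel node (anc, subE)).1 = anc ++ d1) ∧
    (∃ d2, (aFaDfs pd fuel node (anc, subE)).2 = subE ++ d2) ∧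
    node ∈ (aFaDfs pd fuel node (anc, subE)).1 ∧
    InvFA edges sink (aFaDfs pd fuel node (anc, subE)).1 (aFaDfs pd fuel node (anc, subE)).2 ∧
    (∀ e ∈ (aFaDfs pd fuel node (anc, subE)).2, e.1 ∈ (aFaDfs pd fuel node (anc, subE)).1) := by
  intro fuel
  induction fuel with
  | zero => intro node anc subE hm; exact absurd hm (Nat.not_lt_zero _)
  | succ fuel ih =>
    intro node anc subE hm hnodeU hnodeR hinv hclo hout
    by_cases hb : PySem.Set.contains anc node = true
    · have hres : aFaDfs pd (fuel + 1) node (anc, subE) = (anc, subE) := by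
        simp only [aFaDfs, hb, if_true]
      rw [hres]
      have hmem : node ∈ anc := (PySem.Set.contains_iff anc node).mp hb
      exact ⟨⟨[], by simp⟩, ⟨[], by simp⟩, hmem, hinv,
        fun e he => (hclo e he).elim id (fun h => h ▸ hmem)⟩
    · have hnm : node ∉ anc := fun h => hb ((PySem.Set.contains_iff anc node).mpr h)
      have hadd : PySem.Set.add anc node = anc ++ [node] := PySem.Set.add_of_not_mem hnm
      have hres : aFaDfs pd (fuel + 1) node (anc, subE) =
          (predsL edges node).foldl
            (fun st2 p => aFaDfs pd fuel p (st2.1, st2.2 ++ [(p, node)]))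
            (anc ++ [node], subE) := by
        simp only [aFaDfs, hb, if_false, hpd, hadd]
        simp
      rw [hres]
      obtain ⟨hnd, hrc, hec, hoc⟩ := hinv
      have hinv1 : InvFA edges sink (anc ++ [node]) subE := by
        refine ⟨by simp [List.nodup_append, hnd]; exact fun a ha h => hnm (h ▸ ha), ?_, ?_, ?_⟩
        · intro x hx
          rcases List.mem_append.mp hx with h | h
          · exact hrc x h
          · rw [List.mem_singleton] at h; subst h; exact ⟨hnodeR, hnodeU⟩
        · intro e he
          exact ⟨(hec e he).1, List.mem_append_left _ (hec e he).2⟩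
        · intro x hx
          rcases List.mem_append.mp hx with h | h
          · exact hoc x h
          · rw [List.mem_singleton] at h; subst h; exact hout
      have hclo1 : ∀ e ∈ subE, e.1 ∈ anc ++ [node] := by
        intro e he
        rcases hclo e he with h | h
        · exact List.mem_append_left _ h
        · exact h ▸ List.mem_append_right _ (List.mem_singleton_self _)
      have hm1 : meas (uList edges sink) (anc ++ [node]) < fuel := by
        have := meas_lt (uList edges sink) hnodeU hnm
        omega
      have hnodeMem : node ∈ anc ++ [node] := List.mem_append_right _ (List.mem_singleton_self _)
      -- fold over the predecessor list
      have hfold : ∀ (l : List String), (∀ p ∈ l, (p, node) ∈ edges) →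
          ∀ anc' subE', meas (uList edges sink) anc' < fuel →
          InvFA edges sink anc' subE' → (∀ e ∈ subE', e.1 ∈ anc') → node ∈ anc' →
          (∃ d1, (l.foldl (fun st2 p => aFaDfs pd fuel p (st2.1, st2.2 ++ [(p, node)]))
              (anc', subE')).1 = anc' ++ d1) ∧
          (∃ d2, (l.foldl (fun st2 p => aFaDfs pd fuel p (st2.1, st2.2 ++ [(p, node)]))
              (anc', subE')).2 = subE' ++ d2) ∧
          InvFA edges sink
            (l.foldl (fun st2 p => aFaDfs pd fuel p (st2.1, st2.2 ++ [(p, node)])) (anc', subE')).1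
            (l.foldl (fun st2 p => aFaDfs pd fuel p (st2.1, st2.2 ++ [(p, node)])) (anc', subE')).2 ∧
          (∀ e ∈ (l.foldl (fun st2 p => aFaDfs pd fuel p (st2.1, st2.2 ++ [(p, node)]))
              (anc', subE')).2,
            e.1 ∈ (l.foldl (fun st2 p => aFaDfs pd fuel p (st2.1, st2.2 ++ [(p, node)]))
              (anc', subE')).1) := by
        intro l
        induction l with
        | nil =>
          intro _ anc' subE' _ hinv' hclo' _
          exact ⟨⟨[], by simp⟩, ⟨[], by simp⟩, hinv', hclo'⟩
        | cons p ps ihl =>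
          intro hl anc' subE' hm' hinv' hclo' hnode'
          have hpe : (p, node) ∈ edges := hl p (List.mem_cons_self)
          obtain ⟨hnd', hrc', hec', hoc'⟩ := hinv'
          have hinv'' : InvFA edges sink anc' (subE' ++ [(p, node)]) := by
            refine ⟨hnd', hrc', ?_, ?_⟩
            · intro e he
              rcases List.mem_append.mp he with h | h
              · exact hec' e h
              · rw [List.mem_singleton] at h; subst h; exact ⟨hpe, hnode'⟩
            · intro x hx
              rcases hoc' x hx with h | ⟨m, hmm⟩
              · exact Or.inl h
              · exact Or.inr ⟨m, List.mem_append_left _ hmm⟩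
          have hcall := ih p anc' (subE' ++ [(p, node)]) hm' (mem_uList_fst sink hpe)
            (Relation.ReflTransGen.head hpe ((hrc' node hnode').1)) hinv''
            (by
              intro e he
              rcases List.mem_append.mp he with h | h
              · exact Or.inl (hclo' e h)
              · rw [List.mem_singleton] at h; subst h; exact Or.inr rfl)
            (Or.inr ⟨node, List.mem_append_right _ (List.mem_singleton_self _)⟩)
          obtain ⟨⟨d1, hd1⟩, ⟨d2, hd2⟩, hpmem, hinvc, hcloc⟩ := hcall
          simp only [List.foldl_cons]
          have hrec := ihl (fun q hq => hl q (List.mem_cons_of_mem _ hq))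
            (aFaDfs pd fuel p (anc', subE' ++ [(p, node)])).1
            (aFaDfs pd fuel p (anc', subE' ++ [(p, node)])).2
            (by
              have hsub : ∀ x ∈ anc', x ∈ (aFaDfs pd fuel p (anc', subE' ++ [(p, node)])).1 := by
                intro x hx; rw [hd1]; exact List.mem_append_left _ hx
              have := meas_mono (uList edges sink) hsub
              omega)
            hinvc hcloc
            (by rw [hd1]; exact List.mem_append_left _ hnode')
          obtain ⟨⟨e1, he1⟩, ⟨e2, he2⟩, hinvf, hclof⟩ := hrec
          refine ⟨⟨d1 ++ e1, ?_⟩, ⟨(p, node) :: d2 ++ e2, ?_⟩, hinvf, hclof⟩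
          · rw [he1, hd1, List.append_assoc]
          · rw [he2, hd2]
            simp
      have hmain := hfold (predsL edges node)
        (fun p hp => mem_predsL.mp hp) (anc ++ [node]) subE hm1 hinv1 hclo1 hnodeMem
      obtain ⟨⟨d1, hd1⟩, hd2, hinvf, hclof⟩ := hmain
      refine ⟨⟨node :: d1, by rw [hd1]; simp⟩, hd2, ?_, hinvf, hclof⟩
      rw [hd1]
      exact List.mem_append_left _ hnodeMem
-- ---------- the two ancestor DFSs run in lockstep ----------

lemma up_sim (pA pB : PySem.Dict String (PySem.Set String))
    (hp : ∀ y, pA.getD y [] = pB.getD y []) :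
    ∀ fuel node anc subE sd, (∀ y, sd.getD y [] = succsL subE y) →
    (altUp pB fuel node (anc, sd)).1 = (aFaDfs pA fuel node (anc, subE)).1 ∧
    (∀ y, (altUp pB fuel node (anc, sd)).2.getD y [] =
      succsL (aFaDfs pA fuel node (anc, subE)).2 y) := by
  intro fuel
  induction fuel with
  | zero =>
    intro node anc subE sd hR
    exact ⟨rfl, hR⟩
  | succ fuel ih =>
    intro node anc subE sd hR
    by_cases hb : PySem.Set.contains anc node = true
    · have h1 : altUp pB (fuel + 1) node (anc, sd) = (anc, sd) := by
        simp only [altUp, hb, if_true]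
      have h2 : aFaDfs pA (fuel + 1) node (anc, subE) = (anc, subE) := by
        simp only [aFaDfs, hb, if_true]
      rw [h1, h2]
      exact ⟨rfl, hR⟩
    · have h1 : altUp pB (fuel + 1) node (anc, sd) =
          (pB.getD node []).foldl
            (fun st2 p => altUp pB fuel p
              (st2.1, st2.2.modify p [] (fun s => PySem.Set.add s node)))
            (PySem.Set.add anc node, sd) := by
        simp only [altUp, hb, if_false]
        simp
      have h2 : aFaDfs pA (fuel + 1) node (anc, subE) =
          (pB.getD node []).foldl
            (fun st2 p => aFaDfs pA fuel p (st2.1, st2.2 ++ [(p, node)]))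
            (PySem.Set.add anc node, subE) := by
        simp only [aFaDfs, hb, if_false]
        rw [hp node]
        simp
      rw [h1, h2]
      have hfold : ∀ (l : List String) anc' subE' sd',
          (∀ y, sd'.getD y [] = succsL subE' y) →
          (l.foldl (fun st2 p => altUp pB fuel p
              (st2.1, st2.2.modify p [] (fun s => PySem.Set.add s node))) (anc', sd')).1 =
            (l.foldl (fun st2 p => aFaDfs pA fuel p (st2.1, st2.2 ++ [(p, node)]))
              (anc', subE')).1 ∧
          (∀ y, (l.foldl (fun st2 p => altUp pB fuel p
              (st2.1, st2.2.modify p [] (fun s => PySem.Set.add s node))) (anc', sd')).2.getD y [] =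
            succsL ((l.foldl (fun st2 p => aFaDfs pA fuel p (st2.1, st2.2 ++ [(p, node)]))
              (anc', subE')).2) y) := by
        intro l
        induction l with
        | nil => intro anc' subE' sd' h; exact ⟨rfl, h⟩
        | cons p ps ihl =>
          intro anc' subE' sd' h
          simp only [List.foldl_cons]
          have hstep : ∀ y, (sd'.modify p [] (fun s => PySem.Set.add s node)).getD y [] =
              succsL (subE' ++ [(p, node)]) y := by
            intro y
            rw [PySem.Dict.getD_modify, succsL_append_singleton]
            by_cases hy : y = p
            · subst hy; simp [h]
            · rw [if_neg hy, if_neg (fun hh => hy hh.symm), h]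
          have hcall := ih p anc' (subE' ++ [(p, node)])
            (sd'.modify p [] (fun s => PySem.Set.add s node)) hstep
          obtain ⟨hc1, hc2⟩ := hcall
          set a1 := altUp pB fuel p (anc', sd'.modify p [] (fun s => PySem.Set.add s node))
            with ha1
          set a2 := aFaDfs pA fuel p (anc', subE' ++ [(p, node)]) with ha2
          rw [show a1 = ((a2.1 : PySem.Set String), a1.2) from by rw [← hc1]]
          exact ihl a2.1 a2.2 a1.2 hc2
      exact hfold (pB.getD node []) (PySem.Set.add anc node) subE sd hR
-- ---------- invariants of find_topo_sort's DFS (postorder property) ----------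

def nodesOf (es : List (String × String)) : List String :=
  PySem.Set.ofList (es.flatMap (fun e => [e.1, e.2]))

lemma mem_nodesOf_fst {es : List (String × String)} {a b : String}
    (h : (a, b) ∈ es) : a ∈ nodesOf es := by
  simp only [nodesOf, PySem.Set.mem_ofList, List.mem_flatMap]
  exact ⟨(a, b), h, by simp⟩

lemma mem_nodesOf_snd {es : List (String × String)} {a b : String}
    (h : (a, b) ∈ es) : b ∈ nodesOf es := by
  simp only [nodesOf, PySem.Set.mem_ofList, List.mem_flatMap]
  exact ⟨(a, b), h, by simp⟩

lemma mem_nodesOf {es : List (String × String)} {x : String} (h : x ∈ nodesOf es) :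
    ∃ e ∈ es, x = e.1 ∨ x = e.2 := by
  simp only [nodesOf, PySem.Set.mem_ofList, List.mem_flatMap] at h
  obtain ⟨e, he, hx⟩ := h
  simp only [List.mem_cons, List.mem_singleton] at hx
  rcases hx with h | h | h
  · exact ⟨e, he, Or.inl h⟩
  · exact ⟨e, he, Or.inr h⟩
  · exact absurd h (by simp)

lemma nodesOf_length_le (es : List (String × String)) :
    (nodesOf es).length ≤ 2 * es.length := by
  have h1 := PySem.Set.length_ofList_le (es.flatMap (fun e => [e.1, e.2]))
  have h2 : (es.flatMap (fun e : String × String => [e.1, e.2])).length = 2 * es.length := by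
    induction es with
    | nil => simp
    | cons e t ih => simp [ih]; omega
  unfold nodesOf
  omega

def GoodR (subE : List (String × String)) : List String → Prop
  | [] => True
  | x :: r => (∀ s ∈ succsL subE x, s ∈ r) ∧ GoodR subE r

lemma goodR_split (subE : List (String × String)) :
    ∀ (R₁ : List String) {R : List String} (x : String) (R₂ : List String),
    GoodR subE R → R = R₁ ++ x :: R₂ → ∀ s ∈ succsL subE x, s ∈ R₂ := by
  intro R₁
  induction R₁ with
  | nil =>
    intro R x R₂ hg hR
    subst hR
    exact hg.1
  | cons a R₁ ih =>
    intro R x R₂ hg hR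
    subst hR
    exact ih x R₂ hg.2 rfl

lemma topo_spec (subE : List (String × String)) (sd : PySem.Dict String (PySem.Set String))
    (hsd : ∀ y, sd.getD y [] = succsL subE y) (hA : Acyc subE) :
    ∀ fuel x V T,
    meas (nodesOf subE) V < fuel → x ∈ nodesOf subE →
    (∀ v ∈ V, v ∈ nodesOf subE) → (∀ t ∈ T, t ∈ V) → T.Nodup → GoodR subE T.reverse →
    (∀ g ∈ V, g ∉ T → Reach subE g x) →
    (∃ dT, (aTopoDfs sd fuel x (V, T)).2 = T ++ dT) ∧
    (∃ dV, (aTopoDfs sd fuel x (V, T)).1 = V ++ dV) ∧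
    (x ∈ (aTopoDfs sd fuel x (V, T)).2 ∨ (x ∈ V ∧ x ∉ T)) ∧
    (∀ v ∈ (aTopoDfs sd fuel x (V, T)).1, v ∈ nodesOf subE) ∧
    (∀ t ∈ (aTopoDfs sd fuel x (V, T)).2, t ∈ (aTopoDfs sd fuel x (V, T)).1) ∧
    (aTopoDfs sd fuel x (V, T)).2.Nodup ∧
    GoodR subE (aTopoDfs sd fuel x (V, T)).2.reverse ∧
    (∀ v ∈ (aTopoDfs sd fuel x (V, T)).1, v ∉ (aTopoDfs sd fuel x (V, T)).2 →
      v ∈ V ∧ v ∉ T) ∧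
    (∀ t ∈ (aTopoDfs sd fuel x (V, T)).2, t ∈ T ∨ t ∉ V) := by
  intro fuel
  induction fuel with
  | zero => intro x V T hm; exact absurd hm (Nat.not_lt_zero _)
  | succ fuel ih =>
    intro x V T hm hxU hVU hTV hTnd hGood hGrey
    by_cases hb : PySem.Set.contains V x = true
    · have hres : aTopoDfs sd (fuel + 1) x (V, T) = (V, T) := by
        simp only [aTopoDfs, hb, if_true]
      rw [hres]
      have hxV : x ∈ V := (PySem.Set.contains_iff V x).mp hb
      refine ⟨⟨[], by simp⟩, ⟨[], by simp⟩, ?_, hVU, hTV, hTnd, hGood,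
        fun v hv hnv => ⟨hv, hnv⟩, fun t ht => Or.inl ht⟩
      by_cases hxT : x ∈ T
      · exact Or.inl hxT
      · exact Or.inr ⟨hxV, hxT⟩
    · have hxV : x ∉ V := fun h => hb ((PySem.Set.contains_iff V x).mpr h)
      have hxT : x ∉ T := fun h => hxV (hTV x h)
      have hadd : PySem.Set.add V x = V ++ [x] := PySem.Set.add_of_not_mem hxV
      have hres : aTopoDfs sd (fuel + 1) x (V, T) =
          (((succsL subE x).foldl (fun st2 s => aTopoDfs sd fuel s st2) (V ++ [x], T)).1,
           ((succsL subE x).foldl (fun st2 s => aTopoDfs sd fuel s st2) (V ++ [x], T)).2 ++ [x]) := by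
        simp only [aTopoDfs, hb, if_false, hsd, hadd]
        simp
      rw [hres]
      have hm1 : meas (nodesOf subE) (V ++ [x]) < fuel := by
        have := meas_lt (nodesOf subE) hxU hxV
        omega
      -- fold over the successor list
      have hfold : ∀ (l : List String), (∀ s ∈ l, (x, s) ∈ subE) →
          ∀ V' T',
          meas (nodesOf subE) V' < fuel →
          (∀ v ∈ V', v ∈ nodesOf subE) → (∀ t ∈ T', t ∈ V') → T'.Nodup →
          GoodR subE T'.reverse →
          x ∈ V' → x ∉ T' →
          (∀ g ∈ V', g ∉ T' → g = x ∨ (g ∈ V ∧ g ∉ T)) →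
          (∃ dV, V' = (V ++ [x]) ++ dV) → (∃ dT, T' = T ++ dT) →
          (∀ t ∈ T', t ∈ T ∨ t ∉ V ++ [x]) →
          (∃ dT, (l.foldl (fun st2 s => aTopoDfs sd fuel s st2) (V', T')).2 = T' ++ dT) ∧
          (∃ dV, (l.foldl (fun st2 s => aTopoDfs sd fuel s st2) (V', T')).1 = V' ++ dV) ∧
          (∀ v ∈ (l.foldl (fun st2 s => aTopoDfs sd fuel s st2) (V', T')).1, v ∈ nodesOf subE) ∧
          (∀ t ∈ (l.foldl (fun st2 s => aTopoDfs sd fuel s st2) (V', T')).2,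
            t ∈ (l.foldl (fun st2 s => aTopoDfs sd fuel s st2) (V', T')).1) ∧
          (l.foldl (fun st2 s => aTopoDfs sd fuel s st2) (V', T')).2.Nodup ∧
          GoodR subE (l.foldl (fun st2 s => aTopoDfs sd fuel s st2) (V', T')).2.reverse ∧
          x ∈ (l.foldl (fun st2 s => aTopoDfs sd fuel s st2) (V', T')).1 ∧
          x ∉ (l.foldl (fun st2 s => aTopoDfs sd fuel s st2) (V', T')).2 ∧
          (∀ g ∈ (l.foldl (fun st2 s => aTopoDfs sd fuel s st2) (V', T')).1,
            g ∉ (l.foldl (fun st2 s => aTopoDfs sd fuel s st2) (V', T')).2 →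
            g = x ∨ (g ∈ V ∧ g ∉ T)) ∧
          (∀ t ∈ (l.foldl (fun st2 s => aTopoDfs sd fuel s st2) (V', T')).2,
            t ∈ T ∨ t ∉ V ++ [x]) ∧
          (∀ s ∈ l, s ∈ (l.foldl (fun st2 s => aTopoDfs sd fuel s st2) (V', T')).2) := by
        intro l
        induction l with
        | nil =>
          intro _ V' T' hm' hVU' hTV' hTnd' hGood' hxV' hxT' hgrey' hdV hdT hfresh
          exact ⟨⟨[], by simp⟩, ⟨[], by simp⟩, hVU', hTV', hTnd', hGood', hxV', hxT',
            hgrey', hfresh, by simp⟩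
        | cons s ss ihl =>
          intro hl V' T' hm' hVU' hTV' hTnd' hGood' hxV' hxT' hgrey' hdV hdT hfresh
          have hse : (x, s) ∈ subE := hl s List.mem_cons_self
          have hsU : s ∈ nodesOf subE := mem_nodesOf_snd hse
          have hGrey2 : ∀ g ∈ V', g ∉ T' → Reach subE g s := by
            intro g hg hgn
            rcases hgrey' g hg hgn with h | ⟨hgV, hgT⟩
            · subst h; exact Relation.ReflTransGen.single hse
            · exact Relation.ReflTransGen.tail (hGrey g hgV hgT) hse
          have hcall := ih s V' T' hm' hsU hVU' hTV' hTnd' hGood' hGrey2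
          obtain ⟨⟨dT1, hdT1⟩, ⟨dV1, hdV1⟩, hsmem, hVU1, hTV1, hTnd1, hGood1, hgrey1,
            hfresh1⟩ := hcall
          -- s ends up black
          have hsT1 : s ∈ (aTopoDfs sd fuel s (V', T')).2 := by
            rcases hsmem with h | ⟨hsV', hsT'⟩
            · exact h
            · exfalso
              rcases hgrey' s hsV' hsT' with h | ⟨hsV, hsT⟩
              · rw [h] at hse
                exact hA x (Relation.TransGen.single hse)
              · exact absurd (Relation.TransGen.tail'_iff.mpr ⟨x, hGrey s hsV hsT, hse⟩) (hA s)
          obtain ⟨dV0, hdV0⟩ := hdV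
          obtain ⟨dT0, hdT0⟩ := hdT
          have hxT1 : x ∉ (aTopoDfs sd fuel s (V', T')).2 := by
            intro hmem
            rcases hfresh1 x hmem with h | h
            · exact hxT' h
            · exact h hxV'
          have hVsub : ∀ v ∈ V', v ∈ (aTopoDfs sd fuel s (V', T')).1 := by
            intro v hv; rw [hdV1]; exact List.mem_append_left _ hv
          simp only [List.foldl_cons]
          have hrec := ihl (fun q hq => hl q (List.mem_cons_of_mem _ hq))
            (aTopoDfs sd fuel s (V', T')).1 (aTopoDfs sd fuel s (V', T')).2
            (by have := meas_mono (nodesOf subE) hVsub; omega)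
            hVU1 hTV1 hTnd1 hGood1
            (hVsub x hxV') hxT1
            (fun g hg hgn => hgrey' g ((hgrey1 g hg hgn).1) ((hgrey1 g hg hgn).2))
            (⟨dV0 ++ dV1, by rw [hdV1, hdV0, List.append_assoc]⟩)
            (⟨dT0 ++ dT1, by rw [hdT1, hdT0, List.append_assoc]⟩)
            (by
              intro t ht
              rcases hfresh1 t ht with h | h
              · exact hfresh t h
              · right
                intro hmem
                exact h (by rw [hdV0]; exact List.mem_append_left _ hmem))
          obtain ⟨⟨dT2, hdT2⟩, ⟨dV2, hdV2⟩, hVUf, hTVf, hTndf, hGoodf, hxVf, hxTf,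
            hgreyf, hfreshf, hssf⟩ := hrec
          -- rewrite the state pair eta
          rw [show (aTopoDfs sd fuel s (V', T')) =
              ((aTopoDfs sd fuel s (V', T')).1, (aTopoDfs sd fuel s (V', T')).2) from rfl]
          refine ⟨⟨dT1 ++ dT2, by rw [hdT2, hdT1, List.append_assoc]⟩,
            ⟨dV1 ++ dV2, by rw [hdV2, hdV1, List.append_assoc]⟩,
            hVUf, hTVf, hTndf, hGoodf, hxVf, hxTf, hgreyf, hfreshf, ?_⟩
          intro q hq
          rcases List.mem_cons.mp hq with h | h
          · subst h
            rw [hdT2]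
            exact List.mem_append_left _ hsT1
          · exact hssf q h
      have hmain := hfold (succsL subE x) (fun q hq => mem_succsL.mp hq)
        (V ++ [x]) T hm1
        (by
          intro v hv
          rcases List.mem_append.mp hv with h | h
          · exact hVU v h
          · rw [List.mem_singleton] at h; subst h; exact hxU)
        (fun t ht => List.mem_append_left _ (hTV t ht)) hTnd hGood
        (List.mem_append_right _ (List.mem_singleton_self _)) hxT
        (by
          intro g hg hgn
          rcases List.mem_append.mp hg with h | h
          · exact Or.inr ⟨h, hgn⟩
          · rw [List.mem_singleton] at h; exact Or.inl h)
        ⟨[], by simp⟩ ⟨[], by simp⟩ (fun t ht => Or.inl ht)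
      obtain ⟨⟨dT1, hdT1⟩, ⟨dV1, hdV1⟩, hVUf, hTVf, hTndf, hGoodf, hxVf, hxTf, hgreyf,
        hfreshf, hsuccf⟩ := hmain
      refine ⟨⟨dT1 ++ [x], by rw [hdT1]; simp⟩,
        ⟨[x] ++ dV1, by rw [hdV1]; simp⟩,
        Or.inl (List.mem_append_right _ (List.mem_singleton_self _)),
        hVUf, ?_, ?_, ?_, ?_, ?_⟩
      · intro t ht
        rcases List.mem_append.mp ht with h | h
        · exact hTVf t h
        · rw [List.mem_singleton] at h; subst h; exact hxVf
      · exact List.Nodup.append hTndf (List.nodup_singleton _)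
          (by intro a ha hb'; rw [List.mem_singleton] at hb'; exact hxTf (hb' ▸ ha))
      · rw [List.reverse_append]
        simp only [List.reverse_singleton, List.singleton_append]
        exact ⟨fun q hq => (List.mem_reverse).mpr (hsuccf q hq), hGoodf⟩
      · intro v hv hnv
        have hvT : v ∉ (List.foldl (fun st2 s => aTopoDfs sd fuel s st2) (V ++ [x], T)
            (succsL subE x)).2 := fun h => hnv (List.mem_append_left _ h)
        have hvx : v ≠ x := by
          intro h
          exact hnv (List.mem_append_right _ (h ▸ List.mem_singleton_self _))
        rcases hgreyf v hv hvT with h | h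
        · exact absurd h hvx
        · exact h
      · intro t ht
        rcases List.mem_append.mp ht with h | h
        · rcases hfreshf t h with h' | h'
          · exact Or.inl h'
          · exact Or.inr (fun hmem => h' (List.mem_append_left _ hmem))
        · rw [List.mem_singleton] at h; subst h
          exact Or.inr hxV
-- ---------- the whole topological-sort run ----------

lemma topo_all (subE : List (String × String)) (sd : PySem.Dict String (PySem.Set String))
    (hsd : ∀ y, sd.getD y [] = succsL subE y) (hA : Acyc subE) (fuel : Nat)
    (hfuel : (nodesOf subE).length < fuel) :
    ∀ (l : List String), (∀ n ∈ l, n ∈ nodesOf subE) → ∀ V T,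
    (∀ v ∈ V, v ∈ nodesOf subE) → (∀ t ∈ T, t ∈ V) → T.Nodup → GoodR subE T.reverse →
    (∀ g ∈ V, g ∈ T) →
    (∃ dT, (l.foldl (fun st n => aTopoDfs sd fuel n st) (V, T)).2 = T ++ dT) ∧
    (∀ v ∈ (l.foldl (fun st n => aTopoDfs sd fuel n st) (V, T)).1, v ∈ nodesOf subE) ∧
    (∀ t ∈ (l.foldl (fun st n => aTopoDfs sd fuel n st) (V, T)).2,
      t ∈ (l.foldl (fun st n => aTopoDfs sd fuel n st) (V, T)).1) ∧
    (l.foldl (fun st n => aTopoDfs sd fuel n st) (V, T)).2.Nodup ∧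
    GoodR subE (l.foldl (fun st n => aTopoDfs sd fuel n st) (V, T)).2.reverse ∧
    (∀ g ∈ (l.foldl (fun st n => aTopoDfs sd fuel n st) (V, T)).1,
      g ∈ (l.foldl (fun st n => aTopoDfs sd fuel n st) (V, T)).2) ∧
    (∀ n ∈ l, n ∈ (l.foldl (fun st n => aTopoDfs sd fuel n st) (V, T)).2) := by
  intro l
  induction l with
  | nil =>
    intro _ V T hVU hTV hTnd hGood hge
    exact ⟨⟨[], by simp⟩, hVU, hTV, hTnd, hGood, hge, by simp⟩
  | cons n ns ihl =>
    intro hl V T hVU hTV hTnd hGood hge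
    have hnU : n ∈ nodesOf subE := hl n List.mem_cons_self
    have hcall := topo_spec subE sd hsd hA fuel n V T
      (lt_of_le_of_lt (meas_le_length _ _) hfuel) hnU hVU hTV hTnd hGood
      (fun g hg hgn => absurd (hge g hg) hgn)
    obtain ⟨⟨dT1, hdT1⟩, ⟨dV1, hdV1⟩, hnmem, hVU1, hTV1, hTnd1, hGood1, hgrey1,
      hfresh1⟩ := hcall
    have hge1 : ∀ g ∈ (aTopoDfs sd fuel n (V, T)).1, g ∈ (aTopoDfs sd fuel n (V, T)).2 := by
      intro g hg
      by_contra hgn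
      obtain ⟨hgV, hgT⟩ := hgrey1 g hg hgn
      exact hgn (by exact absurd (hge g hgV) hgT)
    have hnT1 : n ∈ (aTopoDfs sd fuel n (V, T)).2 := by
      rcases hnmem with h | ⟨hnV, hnT⟩
      · exact h
      · exact absurd (hge n hnV) hnT
    simp only [List.foldl_cons]
    have hrec := ihl (fun q hq => hl q (List.mem_cons_of_mem _ hq))
      (aTopoDfs sd fuel n (V, T)).1 (aTopoDfs sd fuel n (V, T)).2
      hVU1 hTV1 hTnd1 hGood1 hge1
    obtain ⟨⟨dT2, hdT2⟩, hVUf, hTVf, hTndf, hGoodf, hgef, hnsf⟩ := hrec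
    rw [show (aTopoDfs sd fuel n (V, T)) =
        ((aTopoDfs sd fuel n (V, T)).1, (aTopoDfs sd fuel n (V, T)).2) from rfl]
    refine ⟨⟨dT1 ++ dT2, by rw [hdT2, hdT1, List.append_assoc]⟩, hVUf, hTVf, hTndf,
      hGoodf, hgef, ?_⟩
    intro q hq
    rcases List.mem_cons.mp hq with h | h
    · subst h
      rw [hdT2]
      exact List.mem_append_left _ hnT1
    · exact hnsf q h

-- ---------- the DP loop over the postorder list ----------

lemma dp_untouched (stepv : PySem.Dict String Int → String → Int) :
    ∀ (N : List String) (d : PySem.Dict String Int) (y : String), y ∉ N →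
    (N.foldl (fun d i => d.insert i (stepv d i)) d).getD y 0 = d.getD y 0 := by
  intro N
  induction N with
  | nil => intro d y _; rfl
  | cons i N ih =>
    intro d y hy
    simp only [List.foldl_cons]
    rw [ih _ _ (fun h => hy (List.mem_cons_of_mem _ h)),
      PySem.Dict.getD_insert, if_neg (fun h => hy (by rw [h]; exact List.mem_cons_self))]

lemma dp_eq (stepv : PySem.Dict String Int → String → Int)
    (M₁ M₂ : List String) (x : String) (d0 : PySem.Dict String Int)
    (hnd : (M₁ ++ x :: M₂).Nodup) :
    ((M₁ ++ x :: M₂).foldl (fun d i => d.insert i (stepv d i)) d0).getD x 0 =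
      stepv (M₁.foldl (fun d i => d.insert i (stepv d i)) d0) x := by
  rw [List.foldl_append, List.foldl_cons]
  have hx2 : x ∉ M₂ := by
    rw [List.nodup_append] at hnd
    exact fun h => (List.nodup_cons.mp hnd.2.1).1 h
  rw [dp_untouched _ _ _ _ hx2, PySem.Dict.getD_insert, if_pos rfl]

lemma dp_frozen (stepv : PySem.Dict String Int → String → Int)
    (M₁ M₂ : List String) (x : String) (d0 : PySem.Dict String Int)
    (hnd : (M₁ ++ x :: M₂).Nodup) (t : String) (ht : t ∉ x :: M₂) :
    ((M₁ ++ x :: M₂).foldl (fun d i => d.insert i (stepv d i)) d0).getD t 0 =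
      (M₁.foldl (fun d i => d.insert i (stepv d i)) d0).getD t 0 := by
  rw [List.foldl_append, List.foldl_cons]
  have ht2 : t ∉ M₂ := fun h => ht (List.mem_cons_of_mem _ h)
  have htx : t ≠ x := fun h => ht (h ▸ List.mem_cons_self)
  rw [dp_untouched _ _ _ _ ht2, PySem.Dict.getD_insert, if_neg htx]

-- ---------- the memoized recursion computes the same values ----------

lemma memo_spec (qd : PySem.Dict (String × String) Int) (subE : List (String × String))
    (ssD : PySem.Dict String (PySem.Set String))
    (hss : ∀ y, ssD.getD y [] = succsL subE y)
    (L : List String) (s0 : String) (M : List String) (hL : L = s0 :: M)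
    (hGood : GoodR subE L.reverse)
    (v : String → Int) (hv0 : v s0 = 1)
    (hveq : ∀ (L₁ : List String) (x : String) (L₂ : List String), L = L₁ ++ x :: L₂ →
      L₁ ≠ [] → v x = ((succsL subE x).map (fun t => qd.getD (x, t) 0 * v t)).sum) :
    ∀ fuel (L₁ : List String) (x : String) (L₂ : List String)
      (c : PySem.Dict String Int), L = L₁ ++ x :: L₂ → L₁.length < fuel →
    (c.get? s0 = some 1 ∧ ∀ k val, c.get? k = some val → val = v k) →
    (altQty qd ssD fuel c x).1 = v x ∧
    ((altQty qd ssD fuel c x).2.get? s0 = some 1 ∧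
      ∀ k val, (altQty qd ssD fuel c x).2.get? k = some val → val = v k) := by
  intro fuel
  induction fuel with
  | zero => intro L₁ x L₂ c _ hlt; exact absurd hlt (Nat.not_lt_zero _)
  | succ fuel ih =>
    intro L₁ x L₂ c hsplit hlt ⟨hc0, hcv⟩
    by_cases hhit : ∃ val, c.get? x = some val
    · obtain ⟨val, hval⟩ := hhit
      have hres : altQty qd ssD (fuel + 1) c x = (val, c) := by
        simp only [altQty, hval]
      rw [hres]
      exact ⟨hcv x val hval, hc0, hcv⟩
    · have hnone : c.get? x = none := by
        cases h : c.get? x with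
        | none => rfl
        | some val => exact absurd ⟨val, h⟩ hhit
      have hxs0 : x ≠ s0 := by
        intro h
        subst h
        rw [hnone] at hc0
        simp at hc0
      have hL1ne : L₁ ≠ [] := by
        intro h
        subst h
        rw [hL] at hsplit
        simp only [List.nil_append] at hsplit
        injection hsplit with h1 h2
        exact hxs0 h1.symm
      have hres : altQty qd ssD (fuel + 1) c x =
          (((succsL subE x).foldl
            (fun (acc : Int × PySem.Dict String Int) s =>
              let vr := altQty qd ssD fuel acc.2 s
              (acc.1 + qd.getD (x, s) 0 * vr.1, vr.2)) (0, c)).1,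
           ((succsL subE x).foldl
            (fun (acc : Int × PySem.Dict String Int) s =>
              let vr := altQty qd ssD fuel acc.2 s
              (acc.1 + qd.getD (x, s) 0 * vr.1, vr.2)) (0, c)).2.insert x
           ((succsL subE x).foldl
            (fun (acc : Int × PySem.Dict String Int) s =>
              let vr := altQty qd ssD fuel acc.2 s
              (acc.1 + qd.getD (x, s) 0 * vr.1, vr.2)) (0, c)).1) := by
        simp only [altQty, hnone, hss]
      have hsub : ∀ t ∈ succsL subE x, ∃ (P Q : List String), L = P ++ t :: Q ∧
          P.length < fuel := by
        intro t ht
        have hrev : L.reverse = L₂.reverse ++ x :: L₁.reverse := by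
          rw [hsplit]; simp
        have htL1 : t ∈ L₁.reverse := goodR_split subE L₂.reverse x L₁.reverse hGood hrev t ht
        rw [List.mem_reverse] at htL1
        obtain ⟨P, Q, hPQ⟩ := List.append_of_mem htL1
        refine ⟨P, Q ++ x :: L₂, by rw [hsplit, hPQ]; simp, ?_⟩
        have : P.length + 1 + Q.length = L₁.length := by
          rw [hPQ]; simp; omega
        omega
      -- fold over the successors, threading the memo table
      have hfold : ∀ (ts : List String), (∀ t ∈ ts, t ∈ succsL subE x) →
          ∀ (acc : Int) (c' : PySem.Dict String Int),
          (c'.get? s0 = some 1 ∧ ∀ k val, c'.get? k = some val → val = v k) →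
          (ts.foldl (fun (acc : Int × PySem.Dict String Int) s =>
              let vr := altQty qd ssD fuel acc.2 s
              (acc.1 + qd.getD (x, s) 0 * vr.1, vr.2)) (acc, c')).1 =
            acc + (ts.map (fun t => qd.getD (x, t) 0 * v t)).sum ∧
          ((ts.foldl (fun (acc : Int × PySem.Dict String Int) s =>
              let vr := altQty qd ssD fuel acc.2 s
              (acc.1 + qd.getD (x, s) 0 * vr.1, vr.2)) (acc, c')).2.get? s0 = some 1 ∧
            ∀ k val, (ts.foldl (fun (acc : Int × PySem.Dict String Int) s =>
              let vr := altQty qd ssD fuel acc.2 s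
              (acc.1 + qd.getD (x, s) 0 * vr.1, vr.2)) (acc, c')).2.get? k = some val →
              val = v k) := by
        intro ts
        induction ts with
        | nil => intro _ acc c' hc'; exact ⟨by simp, hc'⟩
        | cons t ts iht =>
          intro hts acc c' hc'
          obtain ⟨P, Q, hPQ, hPlt⟩ := hsub t (hts t List.mem_cons_self)
          have hcall := ih P t Q c' hPQ hPlt hc'
          obtain ⟨hval, hcinv⟩ := hcall
          simp only [List.foldl_cons]
          have hrec := iht (fun q hq => hts q (List.mem_cons_of_mem _ hq))
            (acc + qd.getD (x, t) 0 * (altQty qd ssD fuel c' t).1)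
            (altQty qd ssD fuel c' t).2 hcinv
          obtain ⟨h1, h2⟩ := hrec
          refine ⟨?_, h2⟩
          rw [List.map_cons, List.sum_cons, ← Int.add_assoc, ← hval]
          exact h1
      have hmain := hfold (succsL subE x) (fun q hq => hq) 0 c ⟨hc0, hcv⟩
      obtain ⟨h1, hc0', hcv'⟩ := hmain
      rw [hres]
      have hxval : ((succsL subE x).foldl
          (fun (acc : Int × PySem.Dict String Int) s =>
            let vr := altQty qd ssD fuel acc.2 s
            (acc.1 + qd.getD (x, s) 0 * vr.1, vr.2)) (0, c)).1 = v x := by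
        rw [h1, hveq L₁ x L₂ hsplit hL1ne]
        simp
      refine ⟨hxval, ?_, ?_⟩
      · rw [PySem.Dict.get?_insert, if_neg (fun h => hxs0 h.symm)]
        exact hc0'
      · intro k val hk
        rw [PySem.Dict.get?_insert] at hk
        by_cases hkx : k = x
        · rw [if_pos hkx] at hk
          rw [hkx, ← hxval]
          exact (Option.some.injEq .. ▸ hk).symm
        · rw [if_neg hkx] at hk
          exact hcv' k val hk
-- ---------- small helpers for the assembly ----------

lemma meas_nil (U : List String) : meas U [] = U.length := by
  unfold meas
  rw [List.filter_eq_self.mpr]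
  intro a _
  rfl

lemma uList_length_lt {edges : List (String × String)} {sink : String}
    (h : sink ∈ edges.flatMap (fun e => [e.1, e.2])) :
    (uList edges sink).length < 2 * edges.length + 1 := by
  have hflat : (edges.flatMap (fun e : String × String => [e.1, e.2])).length
      = 2 * edges.length := by
    induction edges with
    | nil => simp
    | cons e t ih => simp [ih]; omega
  have hcons : uList edges sink =
      sink :: PySem.Set.discard (PySem.Set.ofList (edges.flatMap (fun e => [e.1, e.2]))) sink :=
    PySem.Set.ofList_cons _ _
  have hsub : PySem.Set.discard (PySem.Set.ofList (edges.flatMap (fun e => [e.1, e.2]))) sink ⊆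
      (PySem.Set.ofList (edges.flatMap (fun e => [e.1, e.2]))).filter
        (fun y => !(y == sink)) := by
    intro y hy
    rw [PySem.Set.mem_discard] at hy
    rw [List.mem_filter]
    exact ⟨hy.1, by simp [hy.2]⟩
  have hnd := PySem.Set.nodup_discard (PySem.Set.ofList (edges.flatMap (fun e => [e.1, e.2])))
    sink (PySem.Set.nodup_ofList _)
  have hlen1 := nodup_length_le_of_subset hnd hsub
  have hlt : ((PySem.Set.ofList (edges.flatMap (fun e => [e.1, e.2]))).filter
      (fun y => !(y == sink))).length <
      (PySem.Set.ofList (edges.flatMap (fun e => [e.1, e.2]))).length := by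
    rw [List.length_filter_lt_length_iff_exists]
    exact ⟨sink, (PySem.Set.mem_ofList _ _).mpr h, by simp⟩
  have hol := PySem.Set.length_ofList_le (edges.flatMap (fun e => [e.1, e.2]))
  rw [hcons]
  simp only [List.length_cons]
  omega

lemma goodR_nil (subE : List (String × String)) : GoodR subE [] := by
  simp [GoodR]

lemma acyc_sub_of_pre (edges : List (String × String))
    (hpre1 : ∀ e ∈ edges,
      (∃ z ∈ (fun s => pvStepSet edges s)^[2 * edges.length + 1] [e.2],
        z ∈ edges.map (fun e => e.2) ∧ z ∉ edges.map (fun e => e.1)) →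
      e.1 ∉ (fun s => pvStepSet edges s)^[2 * edges.length + 1] [e.2])
    (sink : String) (hsinkSnd : sink ∈ edges.map (fun e => e.2))
    (hsinkNoFst : sink ∉ edges.map (fun e => e.1))
    (subE : List (String × String)) (hsub : ∀ e ∈ subE, e ∈ edges)
    (hreach : ∀ x ∈ nodesOf subE, Reach edges x sink) : Acyc subE := by
  intro x hx
  obtain ⟨y, hxy, hyx⟩ := Relation.TransGen.head'_iff.mp hx
  have hxyE : (x, y) ∈ edges := hsub _ hxy
  have hyxE : Reach edges y x :=
    Relation.ReflTransGen.mono (fun a b h => hsub (a, b) h) hyx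
  have hyReach : Reach edges y sink := hreach y (mem_nodesOf_snd hxy)
  exact hpre1 (x, y) hxyE
    ⟨sink, reach_mem_iter edges hyReach, hsinkSnd, hsinkNoFst⟩
    (reach_mem_iter edges hyxE)
-- ---------- the per-sink computations agree (abstract core) ----------

def dpv (edge_qty_d : PySem.Dict (String × String) Int) (subE : List (String × String)) :
    PySem.Dict String Int → String → Int :=
  fun d i => ((succsL subE i).map (fun s => edge_qty_d.getD (i, s) 0 * d.getD s 0)).sum

lemma per_sink_core (edge_qty_d : PySem.Dict (String × String) Int) (sink : String)
    (F : Nat) (anc : List String) (subE : List (String × String))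
    (ssB : PySem.Dict String (PySem.Set String)) (L : List String)
    (hancNd : anc.Nodup) (hsinkAnc : sink ∈ anc)
    (hancOut : ∀ x ∈ anc, x = sink ∨ ∃ m, (x, m) ∈ subE)
    (hnodesAnc : ∀ x ∈ nodesOf subE, x ∈ anc)
    (hssB : ∀ y, ssB.getD y [] = succsL subE y)
    (hLnd : L.Nodup) (hLGood : GoodR subE L.reverse)
    (hLU : ∀ t ∈ L, t ∈ nodesOf subE) (hLall : ∀ n ∈ nodesOf subE, n ∈ L)
    (hLF : L.length ≤ F) (hF1 : 0 < F)
    (net : PySem.Dict (String × String) Int) :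
    (((L.drop 1).foldl
        (fun d i => d.insert i
          ((((aFindSuccs subE).getD i []).map
            (fun s => edge_qty_d.getD (i, s) 0 * d.getD s 0)).sum))
        ((anc.foldl (fun (d : PySem.Dict String Int) an => d.insert an 0)
          PySem.Dict.empty).insert sink 1)).items).foldl
      (fun net p => net.insert (p.1, sink) p.2) net
    =
    (anc.foldl
      (fun (st : PySem.Dict (String × String) Int × PySem.Dict String Int) an =>
        let vr := altQty edge_qty_d ssB F st.2 an
        (st.1.insert (an, sink) vr.1, vr.2))
      (net, PySem.Dict.empty.insert sink 1)).1 := by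
  by_cases hnilE : subE = []
  · -- no ancestors but the sink itself
    subst hnilE
    have hLnil : L = [] := by
      rw [List.eq_nil_iff_forall_not_mem]
      intro t ht
      have htU := hLU t ht
      simp [nodesOf] at htU
    have hancS : anc = [sink] := by
      have hall : ∀ x ∈ anc, x = sink := by
        intro x hx
        rcases hancOut x hx with h | ⟨m, hm⟩
        · exact h
        · simp at hm
      cases hanc0 : anc with
      | nil => rw [hanc0] at hsinkAnc; simp at hsinkAnc
      | cons a t =>
        have ha : a = sink := hall a (by rw [hanc0]; exact List.mem_cons_self)
        have htn : t = [] := by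
          rw [List.eq_nil_iff_forall_not_mem]
          intro y hy
          have hy' : y = sink := hall y (by rw [hanc0]; exact List.mem_cons_of_mem _ hy)
          have hnd' := hancNd
          rw [hanc0] at hnd'
          have hnin := (List.nodup_cons.mp hnd').1
          rw [← ha] at hy'
          exact hnin (hy' ▸ hy)
        rw [ha, htn]
    obtain ⟨F', hF'⟩ := Nat.exists_eq_succ_of_ne_zero (Nat.pos_iff_ne_zero.mp hF1)
    rw [hLnil, hancS, hF']
    simp only [List.drop_nil, List.foldl_nil, List.foldl_cons]
    rw [PySem.Dict.insert_insert_self]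
    have hit : ((PySem.Dict.empty : PySem.Dict String Int).insert sink 1).items
        = [(sink, 1)] := rfl
    rw [hit]
    simp only [List.foldl_cons, List.foldl_nil]
    simp only [altQty, PySem.Dict.get?_insert_self]
  · -- the general case: L = sink :: M
    obtain ⟨e, he⟩ := List.exists_mem_of_ne_nil subE hnilE
    have hLne : L ≠ [] := by
      intro h
      have he1 : e.1 ∈ L := hLall _ (mem_nodesOf_fst (by rw [Prod.mk.eta]; exact he))
      rw [h] at he1
      simp at he1
    obtain ⟨s0, M, rfl⟩ := List.exists_cons_of_ne_nil hLne
    have hs0anc : s0 ∈ anc := hnodesAnc _ (hLU s0 List.mem_cons_self)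
    have hsucc0 : succsL subE s0 = [] := by
      rw [List.eq_nil_iff_forall_not_mem]
      intro t ht
      have hrev : (s0 :: M).reverse = M.reverse ++ s0 :: ([] : List String) := by simp
      have := goodR_split subE M.reverse s0 [] hLGood hrev t ht
      simp at this
    have hs0 : s0 = sink := by
      rcases hancOut s0 hs0anc with h | ⟨m, hm⟩
      · exact h
      · exfalso
        have hmm : m ∈ succsL subE s0 := mem_succsL.mpr hm
        rw [hsucc0] at hmm
        simp at hmm
    subst s0
    have hMnd : M.Nodup := (List.nodup_cons.mp hLnd).2
    have hsinkM : sink ∉ M := (List.nodup_cons.mp hLnd).1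
    have hancL : ∀ a ∈ anc, a ∈ sink :: M := by
      intro a ha
      rcases hancOut a ha with h | ⟨m, hm⟩
      · rw [h]; exact List.mem_cons_self
      · exact hLall a (mem_nodesOf_fst hm)
    -- the DP value function
    have hv0 : (M.foldl (fun d i => d.insert i (dpv edge_qty_d subE d i)) ((anc.foldl (fun (d : PySem.Dict String Int) an => d.insert an 0) PySem.Dict.empty).insert sink 1)).getD sink 0 = 1 := by
      rw [dp_untouched _ M _ sink hsinkM, PySem.Dict.getD_insert, if_pos rfl]
    have hveq : ∀ (L₁ : List String) (x : String) (L₂ : List String),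
        (sink :: M) = L₁ ++ x :: L₂ → L₁ ≠ [] →
        (M.foldl (fun d i => d.insert i (dpv edge_qty_d subE d i)) ((anc.foldl (fun (d : PySem.Dict String Int) an => d.insert an 0) PySem.Dict.empty).insert sink 1)).getD x 0 =
          ((succsL subE x).map (fun t => edge_qty_d.getD (x, t) 0 * (M.foldl (fun d i => d.insert i (dpv edge_qty_d subE d i)) ((anc.foldl (fun (d : PySem.Dict String Int) an => d.insert an 0) PySem.Dict.empty).insert sink 1)).getD t 0)).sum := by
      intro L₁ x L₂ hsplit hL1
      cases L₁ with
      | nil => exact absurd rfl hL1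
      | cons a M₁ =>
        rw [List.cons_append] at hsplit
        injection hsplit with h1 h2
        have hndM : (M₁ ++ x :: L₂).Nodup := by rw [← h2]; exact hMnd
        have hnd' : ((a :: M₁) ++ x :: L₂).Nodup := by
          rw [List.cons_append, ← h2, ← h1]
          exact hLnd
        have hdisj : ∀ t ∈ a :: M₁, t ∉ x :: L₂ :=
          fun t ht htm => ((List.nodup_append.mp hnd').2.2 t ht t htm) rfl
        have hgood : ∀ t ∈ succsL subE x, t ∈ a :: M₁ := by
          intro t ht
          have hrev : (sink :: M).reverse = L₂.reverse ++ x :: (a :: M₁).reverse := by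
            rw [h2, h1]
            simp
          have := goodR_split subE L₂.reverse x ((a :: M₁).reverse) hLGood hrev t ht
          rwa [List.mem_reverse] at this
        conv_lhs => rw [h2]
        rw [dp_eq (dpv edge_qty_d subE) M₁ L₂ x ((anc.foldl (fun (d : PySem.Dict String Int) an => d.insert an 0) PySem.Dict.empty).insert sink 1) hndM]
        show ((succsL subE x).map
            (fun s => edge_qty_d.getD (x, s) 0 * (M₁.foldl (fun d i => d.insert i (dpv edge_qty_d subE d i)) ((anc.foldl (fun (d : PySem.Dict String Int) an => d.insert an 0) PySem.Dict.empty).insert sink 1)).getD s 0)).sum = _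
        apply congrArg List.sum
        apply List.map_congr_left
        intro t ht
        have htM1 : t ∈ a :: M₁ := hgood t ht
        have hfro : (M.foldl (fun d i => d.insert i (dpv edge_qty_d subE d i)) ((anc.foldl (fun (d : PySem.Dict String Int) an => d.insert an 0) PySem.Dict.empty).insert sink 1)).getD t 0 =
            (M₁.foldl (fun d i => d.insert i (dpv edge_qty_d subE d i)) ((anc.foldl (fun (d : PySem.Dict String Int) an => d.insert an 0) PySem.Dict.empty).insert sink 1)).getD t 0 := by
          conv_lhs => rw [h2]
          exact dp_frozen _ M₁ L₂ x _ hndM t (hdisj t htM1)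
        rw [hfro]
    -- cache invariant of the initial memo table
    have hc0 : ((PySem.Dict.empty : PySem.Dict String Int).insert sink 1).get? sink = some 1 ∧
        ∀ k val, ((PySem.Dict.empty : PySem.Dict String Int).insert sink 1).get? k = some val →
          val = (M.foldl (fun d i => d.insert i (dpv edge_qty_d subE d i)) ((anc.foldl (fun (d : PySem.Dict String Int) an => d.insert an 0) PySem.Dict.empty).insert sink 1)).getD k 0 := by
      constructor
      · exact PySem.Dict.get?_insert_self _ _ _
      · intro k val hk
        rw [PySem.Dict.get?_insert] at hk
        by_cases hks : k = sink
        · rw [if_pos hks] at hk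
          rw [hks, hv0]
          exact (Option.some.injEq .. ▸ hk).symm
        · rw [if_neg hks] at hk
          exact absurd hk (by simp [PySem.Dict.get?_empty])
    -- the memoized fold computes the same values
    have hbf : ∀ (l : List String), (∀ a ∈ l, a ∈ sink :: M) →
        ∀ (nt : PySem.Dict (String × String) Int) (c : PySem.Dict String Int),
        (c.get? sink = some 1 ∧ ∀ k val, c.get? k = some val → val = (M.foldl (fun d i => d.insert i (dpv edge_qty_d subE d i)) ((anc.foldl (fun (d : PySem.Dict String Int) an => d.insert an 0) PySem.Dict.empty).insert sink 1)).getD k 0) →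
        (l.foldl
          (fun (st : PySem.Dict (String × String) Int × PySem.Dict String Int) an =>
            let vr := altQty edge_qty_d ssB F st.2 an
            (st.1.insert (an, sink) vr.1, vr.2)) (nt, c)).1
        = l.foldl (fun nt a => nt.insert (a, sink) ((M.foldl (fun d i => d.insert i (dpv edge_qty_d subE d i)) ((anc.foldl (fun (d : PySem.Dict String Int) an => d.insert an 0) PySem.Dict.empty).insert sink 1)).getD a 0)) nt := by
      intro l
      induction l with
      | nil => intro _ nt c _; rfl
      | cons a l ihl =>
        intro hal nt c hc
        have haL : a ∈ sink :: M := hal a List.mem_cons_self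
        obtain ⟨P, Q, hPQ⟩ := List.append_of_mem haL
        have h1 : P.length < (sink :: M).length := by
          rw [hPQ]
          simp
        have hPlen : P.length < F := lt_of_lt_of_le h1 hLF
        have hms := memo_spec edge_qty_d subE ssB hssB (sink :: M) sink M rfl hLGood
          (fun a => (M.foldl (fun d i => d.insert i (dpv edge_qty_d subE d i)) ((anc.foldl (fun (d : PySem.Dict String Int) an => d.insert an 0) PySem.Dict.empty).insert sink 1)).getD a 0) hv0 hveq F P a Q c hPQ hPlen hc
        obtain ⟨hval, hcinv⟩ := hms
        have hval2 : (altQty edge_qty_d ssB F c a).1 = (M.foldl (fun d i => d.insert i (dpv edge_qty_d subE d i)) ((anc.foldl (fun (d : PySem.Dict String Int) an => d.insert an 0) PySem.Dict.empty).insert sink 1)).getD a 0 := hval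
        simp only [List.foldl_cons]
        rw [← hval2]
        exact ihl (fun q hq => hal q (List.mem_cons_of_mem _ hq))
          (nt.insert (a, sink) (altQty edge_qty_d ssB F c a).1)
          (altQty edge_qty_d ssB F c a).2 hcinv
    -- keys of the DP dictionary
    have hkeys0 : ((anc.foldl (fun (d : PySem.Dict String Int) an => d.insert an 0)
        PySem.Dict.empty)).keys = anc := by
      rw [PySem.Dict.keys_foldl_insert (f := fun _ _ => (0 : Int))]
      show PySem.Set.update ((PySem.Dict.empty : PySem.Dict String Int)).keys anc = anc
      have hke : ((PySem.Dict.empty : PySem.Dict String Int)).keys = [] := rfl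
      rw [hke, PySem.Set.update_nil_left, PySem.Set.ofList_eq_self_of_nodup _ hancNd]
    have hkeysd0 : (((anc.foldl (fun (d : PySem.Dict String Int) an => d.insert an 0) PySem.Dict.empty).insert sink 1) : PySem.Dict String Int).keys = anc := by
      rw [PySem.Dict.keys_insert_of_contains]
      · exact hkeys0
      · exact (PySem.Dict.contains_iff_mem_keys _ _).mpr (hkeys0.symm ▸ hsinkAnc)
    have hkeysF : ((M.foldl (fun d i => d.insert i (dpv edge_qty_d subE d i)) ((anc.foldl (fun (d : PySem.Dict String Int) an => d.insert an 0) PySem.Dict.empty).insert sink 1)) : PySem.Dict String Int).keys = anc := by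
      rw [PySem.Dict.keys_foldl_insert, hkeysd0, PySem.Set.update_eq_append_filter,
        List.filter_eq_nil_iff.mpr, List.append_nil]
      intro y hy
      have hy1 : y ∈ M := (PySem.Set.mem_ofList _ _).mp hy
      have hy2 : y ∈ anc := hnodesAnc _ (hLU y (List.mem_cons_of_mem _ hy1))
      simp [PySem.Set.contains_iff, hy2]
    have hitems : ((M.foldl (fun d i => d.insert i (dpv edge_qty_d subE d i)) ((anc.foldl (fun (d : PySem.Dict String Int) an => d.insert an 0) PySem.Dict.empty).insert sink 1)) : PySem.Dict String Int).items =
        anc.map (fun a => (a, (M.foldl (fun d i => d.insert i (dpv edge_qty_d subE d i)) ((anc.foldl (fun (d : PySem.Dict String Int) an => d.insert an 0) PySem.Dict.empty).insert sink 1)).getD a 0)) := by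
      rw [PySem.Dict.items_eq_map_keys _ (by rw [hkeysF]; exact hancNd) 0, hkeysF]
    -- assemble
    simp only [List.drop_succ_cons, List.drop_zero]
    rw [PySem.List.foldl_congr_mem M
      (fun d i => d.insert i
        ((((aFindSuccs subE).getD i []).map
          (fun s => edge_qty_d.getD (i, s) 0 * d.getD s 0)).sum))
      (fun d i => d.insert i (dpv edge_qty_d subE d i)) ((anc.foldl (fun (d : PySem.Dict String Int) an => d.insert an 0) PySem.Dict.empty).insert sink 1)
      (fun acc x _ => by simp only [aFindSuccs_getD]; rfl)]
    rw [hitems, List.foldl_map]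
    rw [hbf anc hancL net _ hc0]

-- ---------- per-sink wrapper: instantiate the core with the real DFS results ----------

lemma per_sink (edges : List (String × String)) (edge_qty : List (String × String × Int))
    (hpre1 : ∀ e ∈ edges,
      (∃ z ∈ (fun s => pvStepSet edges s)^[2 * edges.length + 1] [e.2],
        z ∈ edges.map (fun e => e.2) ∧ z ∉ edges.map (fun e => e.1)) →
      e.1 ∉ (fun s => pvStepSet edges s)^[2 * edges.length + 1] [e.2])
    (sink : String)
    (hsink : sink ∈ PySem.Set.diff (PySem.Set.ofList (edges.map (fun e => e.2)))
      (PySem.Set.ofList (edges.map (fun e => e.1))))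
    (net : PySem.Dict (String × String) Int) :
    ((((aFindTopo (aFaDfs (aFindPreds edges) (2 * edges.length + 1) sink ([], [])).2 (2 * (aFaDfs (aFindPreds edges) (2 * edges.length + 1) sink ([], [])).2.length + 1)).reverse.drop 1).foldl
        (fun d i => d.insert i
          ((((aFindSuccs (aFaDfs (aFindPreds edges) (2 * edges.length + 1) sink ([], [])).2).getD i []).map
            (fun s => (PySem.Dict.ofList (edge_qty.map (fun t => ((t.1, t.2.1), t.2.2)))).getD (i, s) 0 * d.getD s 0)).sum))
        (((aFaDfs (aFindPreds edges) (2 * edges.length + 1) sink ([], [])).1.foldl (fun (d : PySem.Dict String Int) an => d.insert an 0)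
          PySem.Dict.empty).insert sink 1)).items).foldl
      (fun net p => net.insert (p.1, sink) p.2) net
    =
    ((altUp (altPreds edges) (2 * edges.length + 1) sink ([], PySem.Dict.empty)).1.foldl
      (fun (st : PySem.Dict (String × String) Int × PySem.Dict String Int) an =>
        let vr := altQty (PySem.Dict.ofList (edge_qty.map (fun t => ((t.1, t.2.1), t.2.2)))) (altUp (altPreds edges) (2 * edges.length + 1) sink ([], PySem.Dict.empty)).2 (2 * edges.length + 1) st.2 an
        (st.1.insert (an, sink) vr.1, vr.2))
      (net, PySem.Dict.empty.insert sink 1)).1 := by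
  rw [PySem.Set.mem_diff] at hsink
  have hsinkSnd : ∃ e ∈ edges, e.2 = sink := by
    have h1 := hsink.1
    rw [PySem.Set.mem_ofList, List.mem_map] at h1
    obtain ⟨e, he, h2⟩ := h1
    exact ⟨e, he, h2⟩
  have hsinkFlat : sink ∈ edges.flatMap (fun e => [e.1, e.2]) := by
    obtain ⟨e, he, h2⟩ := hsinkSnd
    rw [List.mem_flatMap]
    exact ⟨e, he, by simp [← h2]⟩
  -- simulation: B's DFS returns the same ancestors and successor sets
  obtain ⟨hancB, hssB⟩ := up_sim (aFindPreds edges) (altPreds edges) (preds_getD_eq edges)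
    (2 * edges.length + 1) sink [] [] PySem.Dict.empty (fun y => rfl)
  -- invariants of A's ancestor DFS
  obtain ⟨_, _, hsinkAnc, ⟨hancNd, hancRU, hsubEc, hancOut⟩, hsubClo⟩ :=
    fa_spec edges (aFindPreds edges) (aFindPreds_getD edges) sink
      (2 * edges.length + 1) sink [] []
      (by rw [meas_nil]; exact uList_length_lt hsinkFlat)
      (mem_uList_sink edges sink) Relation.ReflTransGen.refl
      ⟨List.nodup_nil, by simp, by simp, by simp⟩ (by simp) (Or.inl rfl)
  have hsubEdges : ∀ e ∈ (aFaDfs (aFindPreds edges) (2 * edges.length + 1) sink ([], [])).2, e ∈ edges := fun e he => (hsubEc e he).1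
  have hnodesAnc : ∀ x ∈ nodesOf (aFaDfs (aFindPreds edges) (2 * edges.length + 1) sink ([], [])).2, x ∈ (aFaDfs (aFindPreds edges) (2 * edges.length + 1) sink ([], [])).1 := by
    intro x hx
    obtain ⟨e, he, hor⟩ := mem_nodesOf hx
    rcases hor with h | h
    · exact h ▸ hsubClo e he
    · exact h ▸ (hsubEc e he).2
  have hAsub : Acyc (aFaDfs (aFindPreds edges) (2 * edges.length + 1) sink ([], [])).2 :=
    acyc_sub_of_pre edges hpre1 sink
      (by have h1 := hsink.1; rwa [PySem.Set.mem_ofList] at h1)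
      (by have h2 := hsink.2; rwa [PySem.Set.mem_ofList] at h2)
      _ hsubEdges (fun x hx => (hancRU x (hnodesAnc x hx)).1)
  -- the topological sort of the sub-graph
  obtain ⟨_, hLU0, hLV, hLnd, hLGood, hgrey0, hLall⟩ :=
    topo_all (aFaDfs (aFindPreds edges) (2 * edges.length + 1) sink ([], [])).2 (aFindSuccs (aFaDfs (aFindPreds edges) (2 * edges.length + 1) sink ([], [])).2) (aFindSuccs_getD (aFaDfs (aFindPreds edges) (2 * edges.length + 1) sink ([], [])).2) hAsub
      (2 * (aFaDfs (aFindPreds edges) (2 * edges.length + 1) sink ([], [])).2.length + 1)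
      (by have := nodesOf_length_le (aFaDfs (aFindPreds edges) (2 * edges.length + 1) sink ([], [])).2; omega)
      (nodesOf (aFaDfs (aFindPreds edges) (2 * edges.length + 1) sink ([], [])).2) (fun n hn => hn) [] [] (by simp) (by simp) List.nodup_nil
      (goodR_nil _) (by simp)
  have hLU : ∀ t ∈ (((nodesOf (aFaDfs (aFindPreds edges) (2 * edges.length + 1) sink ([], [])).2).foldl (fun st n => aTopoDfs (aFindSuccs (aFaDfs (aFindPreds edges) (2 * edges.length + 1) sink ([], [])).2) (2 * (aFaDfs (aFindPreds edges) (2 * edges.length + 1) sink ([], [])).2.length + 1) n st) (([] : PySem.Set String), ([] : List String))).2), t ∈ nodesOf (aFaDfs (aFindPreds edges) (2 * edges.length + 1) sink ([], [])).2 := fun t ht => hLU0 _ (hLV t ht)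
  have hts : (aFindTopo (aFaDfs (aFindPreds edges) (2 * edges.length + 1) sink ([], [])).2 (2 * (aFaDfs (aFindPreds edges) (2 * edges.length + 1) sink ([], [])).2.length + 1)).reverse = (((nodesOf (aFaDfs (aFindPreds edges) (2 * edges.length + 1) sink ([], [])).2).foldl (fun st n => aTopoDfs (aFindSuccs (aFaDfs (aFindPreds edges) (2 * edges.length + 1) sink ([], [])).2) (2 * (aFaDfs (aFindPreds edges) (2 * edges.length + 1) sink ([], [])).2.length + 1) n st) (([] : PySem.Set String), ([] : List String))).2) := by
    show ((((nodesOf (aFaDfs (aFindPreds edges) (2 * edges.length + 1) sink ([], [])).2).foldl (fun st n => aTopoDfs (aFindSuccs (aFaDfs (aFindPreds edges) (2 * edges.length + 1) sink ([], [])).2) (2 * (aFaDfs (aFindPreds edges) (2 * edges.length + 1) sink ([], [])).2.length + 1) n st) (([] : PySem.Set String), ([] : List String))).2).reverse).reverse = (((nodesOf (aFaDfs (aFindPreds edges) (2 * edges.length + 1) sink ([], [])).2).foldl (fun st n => aTopoDfs (aFindSuccs (aFaDfs (aFindPreds edges) (2 * edges.length + 1) sink ([], [])).2) (2 * (aFaDfs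 (aFindPreds edges) (2 * edges.length + 1) sink ([], [])).2.length + 1) n st) (([] : PySem.Set String), ([] : List String))).2)
    rw [List.reverse_reverse]
  -- length bounds
  have hancU : ∀ x ∈ (aFaDfs (aFindPreds edges) (2 * edges.length + 1) sink ([], [])).1, x ∈ uList edges sink := fun x hx => (hancRU x hx).2
  have hancLen : (aFaDfs (aFindPreds edges) (2 * edges.length + 1) sink ([], [])).1.length ≤ (uList edges sink).length :=
    nodup_length_le_of_subset hancNd hancU
  have hulen : (uList edges sink).length < 2 * edges.length + 1 := uList_length_lt hsinkFlat
  have hLlen : (((nodesOf (aFaDfs (aFindPreds edges) (2 * edges.length + 1) sink ([], [])).2).foldl (fun st n => aTopoDfs (aFindSuccs (aFaDfs (aFindPreds edges) (2 * edges.length + 1) sink ([], [])).2) (2 * (aFaDfs (aFindPreds edges) (2 * edges.length + 1) sink ([], [])).2.length + 1) n st) (([] : PySem.Set String), ([] : List String))).2).length ≤ (aFaDfs (aFindPreds edges) (2 * edges.length + 1) sink ([], [])).1.length :=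
    nodup_length_le_of_subset hLnd (fun t ht => hnodesAnc _ (hLU t ht))
  rw [hts, hancB]
  exact per_sink_core (PySem.Dict.ofList (edge_qty.map (fun t => ((t.1, t.2.1), t.2.2)))) sink (2 * edges.length + 1) (aFaDfs (aFindPreds edges) (2 * edges.length + 1) sink ([], [])).1 (aFaDfs (aFindPreds edges) (2 * edges.length + 1) sink ([], [])).2 (altUp (altPreds edges) (2 * edges.length + 1) sink ([], PySem.Dict.empty)).2 (((nodesOf (aFaDfs (aFindPreds edges) (2 * edges.length + 1) sink ([], [])).2).foldl (fun st n => aTopoDfs (aFindSuccs (aFaDfs (aFindPreds edges) (2 * edges.length + 1) sink ([], [])).2) (2 * (aFaDfs (aFindPreds edges) (2 * edges.length + 1) sink ([], [])).2.length + 1) n st) (([] : PySem.Set String), ([] : List String))).2)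
    hancNd hsinkAnc hancOut hnodesAnc hssB hLnd hLGood hLU hLall
    (by omega) (by omega) net

-- ===== VERDICT (by name: the statement is the Claim_ definition above) =====
theorem cal_net_qty_spec : Claim_equal_cal_net_qty := by
  intro edges edge_qty hdom hpre
  unfold Spec_cal_net_qty
  show (((PySem.Set.diff (PySem.Set.ofList (edges.map (fun e => e.2))) (PySem.Set.ofList (edges.map (fun e => e.1)))).foldl
      (fun (net : PySem.Dict (String × String) Int) n_id =>
      ((((aFindTopo (aFaDfs (aFindPreds edges) (2 * edges.length + 1) n_id ([], [])).2 (2 * (aFaDfs (aFindPreds edges) (2 * edges.length + 1) n_id ([], [])).2.length + 1)).reverse.drop 1).foldl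
        (fun d i => d.insert i
          ((((aFindSuccs (aFaDfs (aFindPreds edges) (2 * edges.length + 1) n_id ([], [])).2).getD i []).map
            (fun s => (PySem.Dict.ofList (edge_qty.map (fun t => ((t.1, t.2.1), t.2.2)))).getD (i, s) 0 * d.getD s 0)).sum))
        (((aFaDfs (aFindPreds edges) (2 * edges.length + 1) n_id ([], [])).1.foldl (fun (d : PySem.Dict String Int) an => d.insert an 0)
          PySem.Dict.empty).insert n_id 1)).items).foldl
      (fun net p => net.insert (p.1, n_id) p.2) net)
      PySem.Dict.empty).items.map (fun p => (p.1.1, p.1.2, p.2)))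
    = (((PySem.Set.diff (PySem.Set.ofList (edges.map (fun e => e.2))) (PySem.Set.ofList (edges.map (fun e => e.1)))).foldl
      (fun (net : PySem.Dict (String × String) Int) n_id =>
      ((altUp (altPreds edges) (2 * edges.length + 1) n_id ([], PySem.Dict.empty)).1.foldl
        (fun (st : PySem.Dict (String × String) Int × PySem.Dict String Int) an =>
          let vr := altQty (PySem.Dict.ofList (edge_qty.map (fun t => ((t.1, t.2.1), t.2.2)))) (altUp (altPreds edges) (2 * edges.length + 1) n_id ([], PySem.Dict.empty)).2 (2 * edges.length + 1) st.2 an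
          (st.1.insert (an, n_id) vr.1, vr.2))
        (net, PySem.Dict.empty.insert n_id 1)).1)
      PySem.Dict.empty).items.map (fun p => (p.1.1, p.1.2, p.2)))
  rw [PySem.List.foldl_congr_mem (PySem.Set.diff (PySem.Set.ofList (edges.map (fun e => e.2))) (PySem.Set.ofList (edges.map (fun e => e.1))))
      (fun (net : PySem.Dict (String × String) Int) n_id =>
      ((((aFindTopo (aFaDfs (aFindPreds edges) (2 * edges.length + 1) n_id ([], [])).2 (2 * (aFaDfs (aFindPreds edges) (2 * edges.length + 1) n_id ([], [])).2.length + 1)).reverse.drop 1).foldl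
        (fun d i => d.insert i
          ((((aFindSuccs (aFaDfs (aFindPreds edges) (2 * edges.length + 1) n_id ([], [])).2).getD i []).map
            (fun s => (PySem.Dict.ofList (edge_qty.map (fun t => ((t.1, t.2.1), t.2.2)))).getD (i, s) 0 * d.getD s 0)).sum))
        (((aFaDfs (aFindPreds edges) (2 * edges.length + 1) n_id ([], [])).1.foldl (fun (d : PySem.Dict String Int) an => d.insert an 0)
          PySem.Dict.empty).insert n_id 1)).items).foldl
      (fun net p => net.insert (p.1, n_id) p.2) net)
      (fun (net : PySem.Dict (String × String) Int) n_id =>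
      ((altUp (altPreds edges) (2 * edges.length + 1) n_id ([], PySem.Dict.empty)).1.foldl
        (fun (st : PySem.Dict (String × String) Int × PySem.Dict String Int) an =>
          let vr := altQty (PySem.Dict.ofList (edge_qty.map (fun t => ((t.1, t.2.1), t.2.2)))) (altUp (altPreds edges) (2 * edges.length + 1) n_id ([], PySem.Dict.empty)).2 (2 * edges.length + 1) st.2 an
          (st.1.insert (an, n_id) vr.1, vr.2))
        (net, PySem.Dict.empty.insert n_id 1)).1)
      PySem.Dict.empty
      (fun acc x hx => per_sink edges edge_qty hpre.1 x hx acc)]
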